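-- pv_equiv track=rewrite | github.com/4cademy/adventOfCode2023 | day10/day10.py | spread_filling
-- ===== SOURCE A (Python) =====
-- def set_char(string, char, index):
--     return string[:index] + char + string[index+1:]
--
-- def spread_filling(data, coordinates):
--     check_coordinates = []
--     changed = True
--     is_outer_filling = False
--     while changed:
--         changed = False
--         for y in range(len(data)):
--             for x in range(len(data[y])):
--                 tmp = data[y][x]
--                 tmp2 = (x, y)
--                 tmp3 = (x, y) not in check_coordinates
--                 if data[y][x] == '1' and ((x, y) not in check_coordinates):
--                     for iter_y in range(y-1, y+2):
--                         for iter_x in range(x-1, x+2):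
--                             if iter_x in range(len(data[0])) and iter_y in range(len(data)):
--                                 if (iter_x, iter_y) not in coordinates:
--                                     data[iter_y] = set_char(data[iter_y], '1', iter_x)
--                                     changed = True
--                                     if iter_x == 0 or iter_x == len(data[0])-1 or iter_y == 0 or iter_y == len(data)-1:
--                                         is_outer_filling = True
--                     check_coordinates.append((x, y))
--     return data, is_outer_filling
-- ===== SOURCE B (Python) =====
-- # B: one-pass DFS flood fill with a stack and hash sets (barrier, visited, filled)
-- # instead of A's repeated whole-grid rescans with a list-membership check.
-- # NOTE: A mutates `data` in place; B builds new rows (return value is what is compared).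
-- def spread_filling(data, coordinates):
--     if not data:
--         return data, False
--     h = len(data)
--     w = len(data[0])
--     barrier = set(coordinates)
--     stack = [(x, y) for y, row in enumerate(data) for x, ch in enumerate(row) if ch == '1']
--     if not stack:
--         return data, False
--     seen = set()     # sources already expanded
--     filled = set()   # cells written '1'
--     is_outer = False
--     while stack:
--         x, y = stack.pop()
--         if (x, y) in seen:
--             continue
--         seen.add((x, y))
--         for ny in range(y - 1, y + 2):
--             for nx in range(x - 1, x + 2):
--                 if 0 <= nx < w and 0 <= ny < h and (nx, ny) not in barrier:
--                     if (nx, ny) not in filled: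
--                         filled.add((nx, ny))
--                         stack.append((nx, ny))
--                     if nx == 0 or nx == w - 1 or ny == 0 or ny == h - 1:
--                         is_outer = True
--     grid = [''.join('1' if (x, y) in filled else ch for x, ch in enumerate(row))
--             for y, row in enumerate(data)]
--     return grid, is_outer
-- ===== Notes on version B (the rewrite author's own statement) =====
-- stated objective: faster
-- what changed: A rescans the whole grid until a pass changes nothing, re-checking every cell against a growing check_coordinates list; B does one stack-based DFS flood fill from the initial '1' cells with hash sets for the barrier, the visited sources and the filled cells, and rebuilds the grid once at the end.
-- outside the precondition, e.g. on spread_filling(['11', '1'], []): A returns (['11', '11'], True), B returns (['11', '1'], True)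
import Mathlib
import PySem

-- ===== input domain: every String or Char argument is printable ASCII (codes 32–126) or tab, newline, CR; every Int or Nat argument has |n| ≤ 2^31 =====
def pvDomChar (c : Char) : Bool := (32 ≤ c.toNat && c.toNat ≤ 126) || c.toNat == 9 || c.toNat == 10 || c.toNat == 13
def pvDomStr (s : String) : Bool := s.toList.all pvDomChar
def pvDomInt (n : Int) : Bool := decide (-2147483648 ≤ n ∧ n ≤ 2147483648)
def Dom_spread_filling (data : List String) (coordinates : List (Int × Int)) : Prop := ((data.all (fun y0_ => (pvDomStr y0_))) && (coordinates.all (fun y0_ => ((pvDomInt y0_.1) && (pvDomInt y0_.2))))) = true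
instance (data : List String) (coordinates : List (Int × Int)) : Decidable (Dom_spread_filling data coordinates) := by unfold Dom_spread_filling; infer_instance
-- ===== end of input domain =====

-- B replaces A's repeated whole-grid rescans (with a list-membership check) by a single
-- stack-based DFS flood fill over sets (objective: faster). A mutates `data` in place;
-- the equivalence proved here is about the RETURN value only (B builds fresh rows).

-- ===== PORT A =====
-- set_char(string, char, index) = string[:index] + char + string[index+1:]  (on List Char)
def pvSetChar (s : List Char) (c : Char) (i : Int) : List Char :=
  PySem.List.slice s none (some i) ++ [c] ++ PySem.List.slice s (some (i + 1)) none

-- body of the innermost double loop of A: q = (iter_x, iter_y); state (data, changed, is_outer)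
def pvWriteCell (coordinates : List (Int × Int)) (st : List (List Char) × Bool × Bool)
    (q : Int × Int) : List (List Char) × Bool × Bool :=
  let g := st.1
  if (0 ≤ q.1 ∧ q.1 < ((g.headD []).length : Int)) ∧ (0 ≤ q.2 ∧ q.2 < (g.length : Int)) then
    if q ∉ coordinates then
      let g' := PySem.List.pySetD g q.2 (pvSetChar (PySem.List.pyGetD g q.2 []) '1' q.1)
      (g', true, st.2.2 || decide (q.1 = 0 ∨ q.1 = ((g'.headD []).length : Int) - 1 ∨
                                   q.2 = 0 ∨ q.2 = (g'.length : Int) - 1))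
    else st
  else st

-- body of A's per-cell scan: "if data[y][x] == '1' and (x, y) not in check_coordinates"
def pvProcessSeed (coordinates : List (Int × Int)) (y : Int)
    (st : List (List Char) × List (Int × Int) × Bool × Bool) (x : Int) :
    List (List Char) × List (Int × Int) × Bool × Bool :=
  if PySem.List.pyGetD (PySem.List.pyGetD st.1 y []) x ' ' = '1' ∧ (x, y) ∉ st.2.1 then
    let r := (PySem.List.pyRange (y - 1) (y + 2) 1).foldl
      (fun s iy => (PySem.List.pyRange (x - 1) (x + 2) 1).foldl
        (fun s2 ix => pvWriteCell coordinates s2 (ix, iy)) s)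
      (st.1, st.2.2.1, st.2.2.2)
    (r.1, st.2.1 ++ [(x, y)], r.2.1, r.2.2)
  else st

-- "for x in range(len(data[y]))"
def pvRowScan (coordinates : List (Int × Int))
    (st : List (List Char) × List (Int × Int) × Bool × Bool) (y : Int) :
    List (List Char) × List (Int × Int) × Bool × Bool :=
  (PySem.List.pyRange 0 ((PySem.List.pyGetD st.1 y []).length : Int) 1).foldl
    (pvProcessSeed coordinates y) st

-- "for y in range(len(data))"
def pvPass (coordinates : List (Int × Int))
    (st : List (List Char) × List (Int × Int) × Bool × Bool) :
    List (List Char) × List (Int × Int) × Bool × Bool :=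
  (PySem.List.pyRange 0 (st.1.length : Int) 1).foldl (pvRowScan coordinates) st

-- "while changed:" (fuel is provably sufficient on the admitted inputs)
def pvLoopA (coordinates : List (Int × Int)) :
    Nat → List (List Char) × List (Int × Int) × Bool → List (List Char) × Bool
  | 0, st => (st.1, st.2.2)
  | n + 1, st =>
    let r := pvPass coordinates (st.1, st.2.1, false, st.2.2)
    if r.2.2.1 then pvLoopA coordinates n (r.1, r.2.1, r.2.2.2) else (r.1, r.2.2.2)

def spread_filling (data : List String) (coordinates : List (Int × Int)) :
    List String × Bool :=
  let g := data.map (·.toList)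
  let r := pvLoopA coordinates
    (g.foldl (fun a row => a + row.length + (g.headD []).length + 1) 2) (g, [], false)
  (r.1.map String.ofList, r.2)

-- ===== PORT B =====
-- seeds: [(x, y) for y, row in enumerate(data) for x, ch in enumerate(row) if ch == '1']
def pvSeedsB (g : List (List Char)) : List (Int × Int) :=
  (g.mapIdx fun y row =>
    (row.mapIdx fun x ch => if ch = '1' then [((x : Int), (y : Int))] else []).flatten).flatten

-- body of the innermost neighbour loop of B: one candidate cell (nx, ny)
def pvVisitCell (barrier : List (Int × Int)) (w h : Int) (ny : Int)
    (s2 : List (Int × Int) × List (Int × Int) × Bool) (nx : Int) :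
    List (Int × Int) × List (Int × Int) × Bool :=
  if 0 ≤ nx ∧ nx < w ∧ 0 ≤ ny ∧ ny < h ∧ (nx, ny) ∉ barrier then
    let s3 := if (nx, ny) ∈ s2.2.1 then (s2.1, s2.2.1)
              else ((nx, ny) :: s2.1, PySem.Set.add s2.2.1 (nx, ny))
    (s3.1, s3.2, s2.2.2 || decide (nx = 0 ∨ nx = w - 1 ∨ ny = 0 ∨ ny = h - 1))
  else s2

-- the neighbour double loop of one popped source p; state (stack, filled, is_outer)
def pvVisitNbrs (barrier : List (Int × Int)) (w h : Int) (p : Int × Int)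
    (st : List (Int × Int) × List (Int × Int) × Bool) :
    List (Int × Int) × List (Int × Int) × Bool :=
  (PySem.List.pyRange (p.2 - 1) (p.2 + 2) 1).foldl (fun s ny =>
    (PySem.List.pyRange (p.1 - 1) (p.1 + 2) 1).foldl (pvVisitCell barrier w h ny) s) st

-- "while stack:" — the stack's top is the list head (Python pops/appends at the end)
def pvDfs (barrier : List (Int × Int)) (w h : Int) :
    Nat → List (Int × Int) → PySem.Set (Int × Int) → PySem.Set (Int × Int) → Bool →
    PySem.Set (Int × Int) × Bool
  | 0, _, _, filled, ou => (filled, ou)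
  | _ + 1, [], _, filled, ou => (filled, ou)
  | n + 1, p :: stack, seen, filled, ou =>
    if p ∈ seen then pvDfs barrier w h n stack seen filled ou
    else
      let r := pvVisitNbrs barrier w h p (stack, filled, ou)
      pvDfs barrier w h n r.1 (PySem.Set.add seen p) r.2.1 r.2.2

def spread_filling_alt (data : List String) (coordinates : List (Int × Int)) :
    List String × Bool :=
  if data.isEmpty then (data, false) else
  let h : Int := data.length
  let w : Int := ((data.headD "").toList.length : Int)
  let g := data.map (·.toList)
  let barrier := PySem.Set.ofList coordinates
  let seeds := pvSeedsB g
  if seeds.isEmpty then (data, false) else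
  let r := pvDfs barrier w h (seeds.length + 10 * (seeds.length + w.toNat * h.toNat) + 1)
    seeds.reverse PySem.Set.empty PySem.Set.empty false
  (g.mapIdx fun y row =>
    String.ofList (row.mapIdx fun x ch => if ((x : Int), (y : Int)) ∈ r.1 then '1' else ch),
   r.2)

-- ===== PRECONDITION & SPEC =====
-- Pre_ excludes grids that contain a '1' and have some row SHORTER than the first row: on
-- those ragged grids what the fill should do at columns past a row's end is unspecified, and
-- A's slicing-based set_char with an out-of-range column concatenates the '1' at the short
-- row's current end (a scan-order-dependent position, not the column addressed) while B
-- leaves nonexistent cells alone — both values are arbitrary choices no one would specify.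
def Pre_spread_filling (data : List String) (coordinates : List (Int × Int)) : Prop :=
  (∀ s ∈ data, (data.headD "").toList.length ≤ s.toList.length) ∨ (∀ s ∈ data, '1' ∉ s.toList)
instance (data : List String) (coordinates : List (Int × Int)) :
    Decidable (Pre_spread_filling data coordinates) := by unfold Pre_spread_filling; infer_instance

def pvWitness_spread_filling : List String × (List (Int × Int)) := (["11", "1 "], [(0, 0)])

def Spec_spread_filling (data : List String) (coordinates : List (Int × Int))
    (out : List String × Bool) : Prop := out = spread_filling_alt data coordinates
instance (data : List String) (coordinates : List (Int × Int)) (out : List String × Bool) :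
    Decidable (Spec_spread_filling data coordinates out) := by unfold Spec_spread_filling; infer_instance

-- ===== CLAIM (what is proved, stated in full; the proofs are below) =====
def Claim_equal_spread_filling : Prop := ∀ (data : List String) (coordinates : List (Int × Int)), Dom_spread_filling data coordinates → Pre_spread_filling data coordinates → Spec_spread_filling data coordinates (spread_filling data coordinates)

-- ===== LEMMAS AND PROOFS =====

-- generic fold helpers
theorem pvFoldl_fix {α σ : Type} (f : σ → α → σ) (l : List α) (s : σ)
    (h : ∀ x ∈ l, f s x = s) : l.foldl f s = s := by
  induction l with
  | nil => simp
  | cons x xs ih =>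
    rw [List.foldl_cons, h x (by simp)]
    exact ih (fun z hz => h z (by simp [hz]))

theorem pvMem_mapIdx {α β : Type} (l : List α) (f : Nat → α → β) (p : β) :
    p ∈ l.mapIdx f ↔ ∃ i, ∃ _ : i < l.length, p = f i l[i] := by
  rw [List.mem_iff_getElem]
  constructor
  · rintro ⟨i, hi, rfl⟩
    exact ⟨i, by simpa using hi, by simp [List.getElem_mapIdx]⟩
  · rintro ⟨i, hi, rfl⟩
    exact ⟨i, by simpa using hi, by simp [List.getElem_mapIdx]⟩

theorem pvMem_flatten_mapIdx {α β : Type} (l : List α) (f : Nat → α → List β) (p : β) :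
    p ∈ (l.mapIdx f).flatten ↔ ∃ i, ∃ _ : i < l.length, p ∈ f i l[i] := by
  rw [List.mem_flatten]
  constructor
  · rintro ⟨a, ha, hp⟩
    rw [List.mem_iff_getElem] at ha
    obtain ⟨i, hi, rfl⟩ := ha
    exact ⟨i, by simpa using hi, by simpa [List.getElem_mapIdx] using hp⟩
  · rintro ⟨i, hi, hp⟩
    exact ⟨f i l[i], List.mem_iff_getElem.2 ⟨i, by simpa using hi, by simp [List.getElem_mapIdx]⟩, hp⟩

theorem pvNodup_length_le (l u : List (Int × Int)) (h1 : l.Nodup) (h2 : ∀ x ∈ l, x ∈ u) :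
    l.length ≤ u.length := by
  calc l.length = l.toFinset.card := (List.toFinset_card_of_nodup h1).symm
  _ ≤ u.toFinset.card := Finset.card_le_card (by intro x hx; simp only [List.mem_toFinset] at hx ⊢; exact h2 x hx)
  _ ≤ u.length := u.toFinset_card_le

-- ghost objects the proofs speak about
def pvGrid0 (data : List String) : List (List Char) := data.map (·.toList)
def pvHt (data : List String) : Int := data.length
def pvWd (data : List String) : Int := ((data.headD "").toList.length : Int)
def pvCellAt (g : List (List Char)) (p : Int × Int) : Char :=
  PySem.List.pyGetD (PySem.List.pyGetD g p.2 []) p.1 ' '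
-- "the grid g has a '1' at p"
def pvIsOne (g : List (List Char)) (p : Int × Int) : Prop :=
  0 ≤ p.1 ∧ 0 ≤ p.2 ∧ p.2 < (g.length : Int) ∧
  p.1 < ((PySem.List.pyGetD g p.2 []).length : Int) ∧ pvCellAt g p = '1'
-- "p is a cell A may write to": in the W×H box and not blocked by coordinates
def pvVT (data : List String) (coordinates : List (Int × Int)) (p : Int × Int) : Prop :=
  0 ≤ p.1 ∧ p.1 < pvWd data ∧ 0 ≤ p.2 ∧ p.2 < pvHt data ∧ p ∉ coordinates
def pvAdj (q p : Int × Int) : Prop :=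
  q.1 - 1 ≤ p.1 ∧ p.1 ≤ q.1 + 1 ∧ q.2 - 1 ≤ p.2 ∧ p.2 ≤ q.2 + 1
def pvStep (data : List String) (coordinates : List (Int × Int)) (q p : Int × Int) : Prop :=
  pvAdj q p ∧ pvVT data coordinates p
-- the closure: cells reachable (≥ 1 spreading step) from an initial '1'
def pvC (data : List String) (coordinates : List (Int × Int)) (p : Int × Int) : Prop :=
  ∃ s, pvIsOne (pvGrid0 data) s ∧ Relation.TransGen (pvStep data coordinates) s p
def pvBorder (data : List String) (p : Int × Int) : Prop :=
  p.1 = 0 ∨ p.1 = pvWd data - 1 ∨ p.2 = 0 ∨ p.2 = pvHt data - 1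
def pvOverlay (g : List (List Char)) (F : List (Int × Int)) : List (List Char) :=
  g.mapIdx fun y row => row.mapIdx fun x ch => if ((x : Int), (y : Int)) ∈ F then '1' else ch
-- all grid cells, for bounding check_coordinates
def pvUnivA (g : List (List Char)) : List (Int × Int) :=
  (g.mapIdx fun y row => row.mapIdx fun x _ => ((x : Int), (y : Int))).flatten
-- the rows-at-least-as-long-as-row-0 precondition (first disjunct of Pre_)
def pvPreA (data : List String) : Prop :=
  ∀ s ∈ data, (data.headD "").toList.length ≤ s.toList.length

-- the A-side loop invariant: the grid is the initial grid overlaid with a set F of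
-- written cells, F is sound for the closure, the flag says "F touches the border",
-- and every checked seed has had all its valid neighbours written
def pvAInv (data : List String) (coordinates : List (Int × Int)) (g : List (List Char))
    (ck : List (Int × Int)) (ou : Bool) : Prop :=
  ∃ F, g = pvOverlay (pvGrid0 data) F ∧ (∀ p ∈ F, pvC data coordinates p) ∧
    (ou = true ↔ ∃ p ∈ F, pvBorder data p) ∧
    (∀ c ∈ ck, ∀ p, pvStep data coordinates c p → p ∈ F)
def pvCkInv (data : List String) (ck : List (Int × Int)) : Prop :=
  ck.Nodup ∧ ∀ c ∈ ck, c ∈ pvUnivA (pvGrid0 data)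

-- basic shape lemmas
theorem pvOverlay_length (g : List (List Char)) (F : List (Int × Int)) :
    (pvOverlay g F).length = g.length := by simp [pvOverlay]

theorem pvOverlay_getElem (g : List (List Char)) (F : List (Int × Int)) (y : Nat)
    (hy : y < g.length) :
    (pvOverlay g F)[y]'(by simpa [pvOverlay_length] using hy) =
      (g[y]).mapIdx (fun x ch => if ((x : Int), (y : Int)) ∈ F then '1' else ch) := by
  simp only [pvOverlay, List.getElem_mapIdx]

theorem pvOverlay_row_length (g : List (List Char)) (F : List (Int × Int)) (y : Nat)
    (hy : y < g.length) :
    ((pvOverlay g F)[y]'(by simpa [pvOverlay_length] using hy)).length = (g[y]).length := by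
  simp [pvOverlay_getElem g F y hy]

theorem pvOverlay_nil (g : List (List Char)) : pvOverlay g [] = g := by
  apply List.ext_getElem (by simp [pvOverlay_length])
  intro y hy _
  simp [pvOverlay, List.getElem_mapIdx]
  apply List.ext_getElem (by simp)
  intro x hx _
  simp [List.getElem_mapIdx]

theorem pvOverlay_congr (g : List (List Char)) (F F' : List (Int × Int))
    (h : ∀ p, p ∈ F ↔ p ∈ F') : pvOverlay g F = pvOverlay g F' := by
  apply List.ext_getElem (by simp [pvOverlay_length])
  intro y hy hy'
  rw [pvOverlay_getElem g F y (by simpa [pvOverlay_length] using hy),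
      pvOverlay_getElem g F' y (by simpa [pvOverlay_length] using hy)]
  apply List.ext_getElem (by simp)
  intro x hx _
  simp only [List.getElem_mapIdx]
  rw [if_congr (h _) rfl rfl]

theorem pvGrid0_headD (data : List String) (hne : data ≠ []) :
    (pvGrid0 data).headD [] = (data.headD "").toList := by
  cases data with
  | nil => exact absurd rfl hne
  | cons d t => simp [pvGrid0]

theorem pvGrid0_length (data : List String) : (pvGrid0 data).length = data.length := by
  simp [pvGrid0]

theorem pvOverlay_headD_length (g : List (List Char)) (F : List (Int × Int)) (hg : g ≠ []) :
    ((pvOverlay g F).headD []).length = (g.headD []).length := by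
  cases g with
  | nil => exact absurd rfl hg
  | cons r t => simp [pvOverlay, List.mapIdx_cons]

theorem pvCellAt_natCast (g : List (List Char)) (x y : Nat) (hy : y < g.length) :
    pvCellAt g ((x : Int), (y : Int)) = (g[y]).getD x ' ' := by
  simp [pvCellAt, PySem.List.pyGetD_natCast, List.getD_eq_getElem?_getD, hy]

theorem pvSetChar_set (s : List Char) (c : Char) (x : Nat) (hx : x < s.length) :
    pvSetChar s c (x : Int) = s.set x c := by
  rw [pvSetChar, PySem.List.slice_to_natCast]
  have h1 : ((x : Int) + 1) = ((x + 1 : Nat) : Int) := by push_cast; ring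
  rw [h1, PySem.List.slice_from_natCast]
  rw [List.set_eq_take_cons_drop c hx]
  simp

theorem pvOverlay_set (g : List (List Char)) (F : List (Int × Int)) (a b : Nat)
    (hb : b < g.length) (ha : a < (g[b]).length) :
    (pvOverlay g F).set b
        (((pvOverlay g F)[b]'(by simpa [pvOverlay_length] using hb)).set a '1') =
      pvOverlay g (F ++ [((a : Int), (b : Int))]) := by
  apply List.ext_getElem (by simp [pvOverlay_length])
  intro y hy hy'
  have hyg : y < g.length := by simpa [pvOverlay_length] using hy
  rw [List.getElem_set]
  rw [pvOverlay_getElem g (F ++ [((a : Int), (b : Int))]) y hyg]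
  by_cases hyb : b = y
  · subst hyb
    rw [if_pos rfl, pvOverlay_getElem g F b hb]
    apply List.ext_getElem (by simp)
    intro x hx hx'
    have hxg : x < (g[b]).length := by simpa using hx'
    rw [List.getElem_set, List.getElem_mapIdx, List.getElem_mapIdx]
    by_cases hax : a = x
    · subst hax
      simp
    · have : ¬ (((x : Int), (b : Int)) = ((a : Int), (b : Int))) := by
        simp only [Prod.mk.injEq, Int.natCast_inj]
        omega
      simp only [if_neg hax, List.mem_append, List.mem_singleton, this, or_false]
  · rw [if_neg hyb, pvOverlay_getElem g F y hyg]
    apply List.ext_getElem (by simp)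
    intro x hx hx'
    rw [List.getElem_mapIdx, List.getElem_mapIdx]
    have : ¬ (((x : Int), (y : Int)) = ((a : Int), (b : Int))) := by
      simp only [Prod.mk.injEq, Int.natCast_inj]
      omega
    simp only [List.mem_append, List.mem_singleton, this, or_false]

-- reading a cell of an overlay
theorem pvOverlay_cell (g : List (List Char)) (F : List (Int × Int)) (x y : Nat)
    (hy : y < g.length) (hx : x < (g[y]).length) :
    pvCellAt (pvOverlay g F) ((x : Int), (y : Int)) =
      if ((x : Int), (y : Int)) ∈ F then '1' else pvCellAt g ((x : Int), (y : Int)) := by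
  have hy' : y < (pvOverlay g F).length := by simpa [pvOverlay_length] using hy
  rw [pvCellAt_natCast (pvOverlay g F) x y hy', pvCellAt_natCast g x y hy]
  rw [pvOverlay_getElem g F y hy]
  have hx1 : x < ((g[y]).mapIdx (fun x ch => if ((x : Int), (y : Int)) ∈ F then '1' else ch)).length := by
    simpa using hx
  rw [List.getD_eq_getElem _ ' ' hx1, List.getD_eq_getElem _ ' ' hx, List.getElem_mapIdx]

-- normal form for pvIsOne
theorem pvIsOne_iff (g : List (List Char)) (p : Int × Int) :
    pvIsOne g p ↔ ∃ x y : Nat, p = ((x : Int), (y : Int)) ∧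
      ∃ hy : y < g.length, x < (g[y]).length ∧ (g[y]).getD x ' ' = '1' := by
  obtain ⟨a, b⟩ := p
  constructor
  · rintro ⟨h1, h2, h3, h4, h5⟩
    simp only at h1 h2 h3 h4 h5
    lift a to ℕ using h1 with x
    lift b to ℕ using h2 with y
    have hy : y < g.length := by exact_mod_cast h3
    have hrow : PySem.List.pyGetD g ((y : Nat) : Int) [] = g[y] := by
      rw [PySem.List.pyGetD_natCast, List.getD_eq_getElem _ _ hy]
    refine ⟨x, y, rfl, hy, ?_, ?_⟩
    · rw [hrow] at h4; exact_mod_cast h4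
    · rw [pvCellAt_natCast g x y hy] at h5; exact h5
  · rintro ⟨x, y, hp, hy, hx, hch⟩
    obtain ⟨rfl, rfl⟩ : a = ((x : Nat) : Int) ∧ b = ((y : Nat) : Int) := by
      simpa [Prod.ext_iff] using hp
    have hrow : PySem.List.pyGetD g ((y : Nat) : Int) [] = g[y] := by
      rw [PySem.List.pyGetD_natCast, List.getD_eq_getElem _ _ hy]
    refine ⟨by simp, by simp, by simpa using hy, by simp only [hrow]; exact_mod_cast hx, ?_⟩
    rw [pvCellAt_natCast g x y hy]
    exact hch

theorem pvC_vt (data : List String) (coordinates : List (Int × Int)) (p : Int × Int)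
    (h : pvC data coordinates p) : pvVT data coordinates p := by
  obtain ⟨s, _, htg⟩ := h
  induction htg with
  | single h => exact h.2
  | tail _ h _ => exact h.2

-- '1'-cells of an overlay (needs F ⊆ valid targets and the row-length precondition)
theorem pvPreA_row (data : List String) (hpre : pvPreA data) (y : Nat) (hy : y < data.length) :
    (data.headD "").toList.length ≤ (((pvGrid0 data)[y]'(by simpa [pvGrid0_length] using hy)).length) := by
  have hmem : data[y] ∈ data := List.getElem_mem hy
  have := hpre data[y] hmem
  simpa [pvGrid0] using this

theorem pvIsOne_overlay (data : List String) (coordinates : List (Int × Int))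
    (F : List (Int × Int)) (hpre : pvPreA data)
    (hF : ∀ p ∈ F, pvVT data coordinates p) (p : Int × Int) :
    pvIsOne (pvOverlay (pvGrid0 data) F) p ↔ p ∈ F ∨ pvIsOne (pvGrid0 data) p := by
  constructor
  · intro h
    rw [pvIsOne_iff] at h
    obtain ⟨x, y, rfl, hy, hx, hch⟩ := h
    have hy0 : y < (pvGrid0 data).length := by simpa [pvOverlay_length] using hy
    have hx0 : x < ((pvGrid0 data)[y]).length := by
      have := pvOverlay_row_length (pvGrid0 data) F y hy0
      omega
    have hcell := pvOverlay_cell (pvGrid0 data) F x y hy0 hx0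
    rw [pvCellAt_natCast (pvOverlay (pvGrid0 data) F) x y hy] at hcell
    rw [hch] at hcell
    by_cases hmem : ((x : Int), (y : Int)) ∈ F
    · exact Or.inl hmem
    · right
      rw [if_neg hmem] at hcell
      rw [pvIsOne_iff]
      refine ⟨x, y, rfl, hy0, hx0, ?_⟩
      rw [pvCellAt_natCast _ x y hy0] at hcell
      exact hcell.symm
  · intro h
    rcases h with hmem | hone
    · obtain ⟨a, b⟩ := p
      obtain ⟨hx0, hxW, hy0, hyH, _⟩ := hF _ hmem
      simp only at hx0 hxW hy0 hyH
      lift a to ℕ using hx0 with x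
      lift b to ℕ using hy0 with y
      have hyg : y < (pvGrid0 data).length := by
        rw [pvGrid0_length]
        simp only [pvHt] at hyH
        exact_mod_cast hyH
      have hxg : x < ((pvGrid0 data)[y]).length := by
        have hW := pvPreA_row data hpre y (by simpa [pvGrid0_length] using hyg)
        simp only [pvWd] at hxW
        have : x < (data.headD "").toList.length := by exact_mod_cast hxW
        omega
      rw [pvIsOne_iff]
      have hy' : y < (pvOverlay (pvGrid0 data) F).length := by
        simpa [pvOverlay_length] using hyg
      refine ⟨x, y, rfl, hy', ?_, ?_⟩
      · have := pvOverlay_row_length (pvGrid0 data) F y hyg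
        omega
      · have h1 : pvCellAt (pvOverlay (pvGrid0 data) F) ((x : Int), (y : Int)) = '1' := by
          rw [pvOverlay_cell (pvGrid0 data) F x y hyg hxg, if_pos hmem]
        rw [pvCellAt_natCast _ x y hy'] at h1
        exact h1
    · rw [pvIsOne_iff] at hone
      obtain ⟨x, y, rfl, hy, hx, hch⟩ := hone
      rw [pvIsOne_iff]
      have hy' : y < (pvOverlay (pvGrid0 data) F).length := by
        simpa [pvOverlay_length] using hy
      refine ⟨x, y, rfl, hy', ?_, ?_⟩
      · have := pvOverlay_row_length (pvGrid0 data) F y hy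
        omega
      · have h1 : pvCellAt (pvOverlay (pvGrid0 data) F) ((x : Int), (y : Int)) = '1' := by
          rw [pvOverlay_cell (pvGrid0 data) F x y hy hx]
          split_ifs with hmem
          · rfl
          · rw [pvCellAt_natCast _ x y hy, List.getD_eq_getElem _ _ hx]
            rw [List.getD_eq_getElem _ _ hx] at hch
            exact hch
        rw [pvCellAt_natCast _ x y hy'] at h1
        exact h1

-- seeds of port B are exactly the '1'-cells of the initial grid
theorem pvSeedsB_mem (g : List (List Char)) (p : Int × Int) :
    p ∈ pvSeedsB g ↔ pvIsOne g p := by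
  rw [pvSeedsB, pvMem_flatten_mapIdx, pvIsOne_iff]
  constructor
  · rintro ⟨y, hy, hp⟩
    rw [pvMem_flatten_mapIdx] at hp
    obtain ⟨x, hx, hp⟩ := hp
    split_ifs at hp with hch
    · simp only [List.mem_singleton] at hp
      exact ⟨x, y, hp, hy, hx, by rw [List.getD_eq_getElem _ _ hx]; exact hch⟩
    · simp at hp
  · rintro ⟨x, y, rfl, hy, hx, hch⟩
    refine ⟨y, hy, ?_⟩
    rw [pvMem_flatten_mapIdx]
    refine ⟨x, hx, ?_⟩
    rw [List.getD_eq_getElem _ _ hx] at hch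
    rw [if_pos hch]
    simp

theorem pvUnivA_mem (g : List (List Char)) (x y : Nat) (hy : y < g.length)
    (hx : x < (g[y]).length) : ((x : Int), (y : Int)) ∈ pvUnivA g := by
  rw [pvUnivA, pvMem_flatten_mapIdx]
  exact ⟨y, hy, (pvMem_mapIdx _ _ _).2 ⟨x, hx, rfl⟩⟩

theorem pvUnivA_length (g : List (List Char)) :
    (pvUnivA g).length = (g.map List.length).sum := by
  rw [pvUnivA, List.length_flatten]
  congr 1
  apply List.ext_getElem (by simp)
  intro y hy hy'
  simp [List.getElem_mapIdx]

theorem pvFuelA_ge (g : List (List Char)) :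
    (g.map List.length).sum + 2 ≤
      g.foldl (fun a row => a + row.length + (g.headD []).length + 1) 2 := by
  have key : ∀ (l : List (List Char)) (W : Nat) (a : Nat),
      a + (l.map List.length).sum ≤ l.foldl (fun acc row => acc + row.length + W + 1) a := by
    intro l W
    induction l with
    | nil => intro a; simp
    | cons r t ih =>
      intro a
      have := ih (a + r.length + W + 1)
      simp only [List.map_cons, List.sum_cons, List.foldl_cons]
      omega
  have := key g (g.headD []).length 2
  omega

-- ==== A side: one write ====
theorem pvGrid0_ne (data : List String) (hne : data ≠ []) : pvGrid0 data ≠ [] := by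
  simp only [pvGrid0]
  exact fun hcontra => hne (List.map_eq_nil_iff.mp hcontra)

theorem pvWriteCell_step (data : List String) (coordinates : List (Int × Int))
    (hne : data ≠ []) (hpre : pvPreA data) (c q : Int × Int)
    (hsrc : pvIsOne (pvGrid0 data) c ∨ pvC data coordinates c) (hadj : pvAdj c q)
    (st : List (List Char) × Bool × Bool) (F : List (Int × Int))
    (hov : st.1 = pvOverlay (pvGrid0 data) F)
    (hC : ∀ p ∈ F, pvC data coordinates p)
    (hvt : ∀ p ∈ F, pvVT data coordinates p)
    (hflag : st.2.2 = true ↔ ∃ p ∈ F, pvBorder data p) :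
    ∃ F', (pvWriteCell coordinates st q).1 = pvOverlay (pvGrid0 data) F' ∧
      (∀ p ∈ F', pvC data coordinates p) ∧ (∀ p ∈ F', pvVT data coordinates p) ∧
      ((pvWriteCell coordinates st q).2.2 = true ↔ ∃ p ∈ F', pvBorder data p) ∧
      (∀ p ∈ F, p ∈ F') ∧ (pvVT data coordinates q → q ∈ F') ∧
      ((pvWriteCell coordinates st q).2.1 = false → pvWriteCell coordinates st q = st) := by
  obtain ⟨g0, ch0, ou0⟩ := st
  simp only at hov hflag
  subst hov
  have hG0ne := pvGrid0_ne data hne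
  have hlen : (pvOverlay (pvGrid0 data) F).length = data.length := by
    rw [pvOverlay_length, pvGrid0_length]
  have hhead : ((pvOverlay (pvGrid0 data) F).headD []).length = (data.headD "").toList.length := by
    rw [pvOverlay_headD_length _ _ hG0ne, pvGrid0_headD data hne]
  rw [pvWriteCell]
  by_cases hcond : (0 ≤ q.1 ∧ q.1 < (((pvOverlay (pvGrid0 data) F).headD []).length : Int)) ∧
      (0 ≤ q.2 ∧ q.2 < (((pvOverlay (pvGrid0 data) F).length : Nat) : Int))
  · rw [if_pos hcond]
    by_cases hco : q ∉ coordinates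
    · rw [if_pos hco]
      obtain ⟨⟨hx0, hxW⟩, ⟨hy0, hyH⟩⟩ := hcond
      obtain ⟨qx, qy⟩ := q
      simp only at hx0 hxW hy0 hyH
      lift qx to ℕ using hx0 with a
      lift qy to ℕ using hy0 with b
      have hbN : b < data.length := by rw [hlen] at hyH; exact_mod_cast hyH
      have haW : a < (data.headD "").toList.length := by rw [hhead] at hxW; exact_mod_cast hxW
      have hb0 : b < (pvGrid0 data).length := by rwa [pvGrid0_length]
      have ha0 : a < ((pvGrid0 data)[b]).length := by
        have := pvPreA_row data hpre b hbN
        omega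
      have hb' : b < (pvOverlay (pvGrid0 data) F).length := by rwa [pvOverlay_length]
      have hrowget : PySem.List.pyGetD (pvOverlay (pvGrid0 data) F) ((b : Nat) : Int) [] =
          (pvOverlay (pvGrid0 data) F)[b] := by
        rw [PySem.List.pyGetD_natCast, List.getD_eq_getElem _ _ hb']
      have ha' : a < ((pvOverlay (pvGrid0 data) F)[b]).length := by
        rw [pvOverlay_row_length _ _ b hb0]
        exact ha0
      have hg' : PySem.List.pySetD (pvOverlay (pvGrid0 data) F) ((b : Nat) : Int)
          (pvSetChar (PySem.List.pyGetD (pvOverlay (pvGrid0 data) F) ((b : Nat) : Int) []) '1'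
            ((a : Nat) : Int)) =
          pvOverlay (pvGrid0 data) (F ++ [((a : Int), (b : Int))]) := by
        rw [hrowget, pvSetChar_set _ _ a ha', PySem.List.pySetD_natCast]
        exact pvOverlay_set (pvGrid0 data) F a b hb0 ha0
      have hvtq : pvVT data coordinates ((a : Int), (b : Int)) := by
        refine ⟨by simp, ?_, by simp, ?_, hco⟩
        · simp only [pvWd]; exact_mod_cast haW
        · simp only [pvHt]; exact_mod_cast hbN
      have hCq : pvC data coordinates ((a : Int), (b : Int)) := by
        rcases hsrc with h1 | h1
        · exact ⟨c, h1, Relation.TransGen.single ⟨hadj, hvtq⟩⟩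
        · obtain ⟨s0, hs0, htg⟩ := h1
          exact ⟨s0, hs0, htg.tail ⟨hadj, hvtq⟩⟩
      refine ⟨F ++ [((a : Int), (b : Int))], ?_, ?_, ?_, ?_, ?_, ?_, ?_⟩
      · simpa using hg'
      · intro p hp
        rcases List.mem_append.mp hp with h | h
        · exact hC p h
        · rw [List.mem_singleton.mp h]; exact hCq
      · intro p hp
        rcases List.mem_append.mp hp with h | h
        · exact hvt p h
        · rw [List.mem_singleton.mp h]; exact hvtq
      · -- flag
        simp only [hg']
        have hlen2 : (pvOverlay (pvGrid0 data) (F ++ [((a : Int), (b : Int))])).length = data.length := by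
          rw [pvOverlay_length, pvGrid0_length]
        have hhead2 : ((pvOverlay (pvGrid0 data) (F ++ [((a : Int), (b : Int))])).headD []).length =
            (data.headD "").toList.length := by
          rw [pvOverlay_headD_length _ _ hG0ne, pvGrid0_headD data hne]
        rw [hlen2, hhead2, Bool.or_eq_true, decide_eq_true_eq]
        constructor
        · rintro (h | h)
          · obtain ⟨p, hp, hb⟩ := hflag.mp h
            exact ⟨p, List.mem_append_left _ hp, hb⟩
          · refine ⟨((a : Int), (b : Int)), List.mem_append_right _ (by simp), ?_⟩
            simpa [pvBorder, pvWd, pvHt] using h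
        · rintro ⟨p, hp, hb⟩
          rcases List.mem_append.mp hp with h | h
          · exact Or.inl (hflag.mpr ⟨p, h, hb⟩)
          · right
            rw [List.mem_singleton.mp h] at hb
            simpa [pvBorder, pvWd, pvHt] using hb
      · intro p hp; exact List.mem_append_left _ hp
      · intro _; exact List.mem_append_right _ (by simp)
      · intro hcontra; simp at hcontra
    · rw [if_neg hco]
      refine ⟨F, rfl, hC, hvt, hflag, fun p hp => hp, ?_, fun _ => rfl⟩
      intro hvtq
      exact absurd (fun hmem => hvtq.2.2.2.2 hmem) hco
  · rw [if_neg hcond]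
    refine ⟨F, rfl, hC, hvt, hflag, fun p hp => hp, ?_, fun _ => rfl⟩
    intro hvtq
    exfalso
    apply hcond
    obtain ⟨h1, h2, h3, h4, _⟩ := hvtq
    refine ⟨⟨h1, ?_⟩, h3, ?_⟩
    · rw [hhead]; simpa [pvWd] using h2
    · rw [hlen]; simpa [pvHt] using h4

-- ==== A side: the 3×3 write block of one processed seed ====
theorem pvWriteRow (data : List String) (coordinates : List (Int × Int))
    (hne : data ≠ []) (hpre : pvPreA data) (c : Int × Int)
    (hsrc : pvIsOne (pvGrid0 data) c ∨ pvC data coordinates c) (iy : Int) :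
    ∀ (xs : List Int) (st : List (List Char) × Bool × Bool) (F : List (Int × Int)),
    st.1 = pvOverlay (pvGrid0 data) F →
    (∀ p ∈ F, pvC data coordinates p) →
    (∀ p ∈ F, pvVT data coordinates p) →
    (st.2.2 = true ↔ ∃ p ∈ F, pvBorder data p) →
    (∀ ix ∈ xs, pvAdj c (ix, iy)) →
    ∃ F', (xs.foldl (fun s2 ix => pvWriteCell coordinates s2 (ix, iy)) st).1 =
        pvOverlay (pvGrid0 data) F' ∧
      (∀ p ∈ F', pvC data coordinates p) ∧ (∀ p ∈ F', pvVT data coordinates p) ∧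
      ((xs.foldl (fun s2 ix => pvWriteCell coordinates s2 (ix, iy)) st).2.2 = true ↔
        ∃ p ∈ F', pvBorder data p) ∧
      (∀ p ∈ F, p ∈ F') ∧
      (∀ ix ∈ xs, pvVT data coordinates (ix, iy) → (ix, iy) ∈ F') ∧
      ((xs.foldl (fun s2 ix => pvWriteCell coordinates s2 (ix, iy)) st).2.1 = false →
        xs.foldl (fun s2 ix => pvWriteCell coordinates s2 (ix, iy)) st = st) := by
  intro xs
  induction xs with
  | nil =>
    intro st F hov hC hvt hflag _
    exact ⟨F, hov, hC, hvt, hflag, fun p hp => hp, by simp, fun _ => rfl⟩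
  | cons ix rest ih =>
    intro st F hov hC hvt hflag hadjs
    obtain ⟨F1, h1ov, h1C, h1vt, h1flag, h1sub, h1q, h1bp⟩ :=
      pvWriteCell_step data coordinates hne hpre c (ix, iy) hsrc
        (hadjs ix (by simp)) st F hov hC hvt hflag
    obtain ⟨F2, h2ov, h2C, h2vt, h2flag, h2sub, h2hits, h2bp⟩ :=
      ih (pvWriteCell coordinates st (ix, iy)) F1 h1ov h1C h1vt h1flag
        (fun z hz => hadjs z (by simp [hz]))
    rw [List.foldl_cons]
    refine ⟨F2, h2ov, h2C, h2vt, h2flag, fun p hp => h2sub p (h1sub p hp), ?_, ?_⟩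
    · intro z hz hvtz
      rcases List.mem_cons.mp hz with rfl | hz'
      · exact h2sub _ (h1q hvtz)
      · exact h2hits z hz' hvtz
    · intro hch
      have heq := h2bp hch
      rw [heq] at hch ⊢
      rw [h1bp hch]

theorem pvWriteBlock (data : List String) (coordinates : List (Int × Int))
    (hne : data ≠ []) (hpre : pvPreA data) (c : Int × Int)
    (hsrc : pvIsOne (pvGrid0 data) c ∨ pvC data coordinates c)
    (st : List (List Char) × Bool × Bool) (F : List (Int × Int))
    (hov : st.1 = pvOverlay (pvGrid0 data) F)
    (hC : ∀ p ∈ F, pvC data coordinates p)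
    (hvt : ∀ p ∈ F, pvVT data coordinates p)
    (hflag : st.2.2 = true ↔ ∃ p ∈ F, pvBorder data p) :
    ∃ F', ((PySem.List.pyRange (c.2 - 1) (c.2 + 2) 1).foldl
        (fun s iy => (PySem.List.pyRange (c.1 - 1) (c.1 + 2) 1).foldl
          (fun s2 ix => pvWriteCell coordinates s2 (ix, iy)) s) st).1 =
        pvOverlay (pvGrid0 data) F' ∧
      (∀ p ∈ F', pvC data coordinates p) ∧ (∀ p ∈ F', pvVT data coordinates p) ∧
      (((PySem.List.pyRange (c.2 - 1) (c.2 + 2) 1).foldl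
        (fun s iy => (PySem.List.pyRange (c.1 - 1) (c.1 + 2) 1).foldl
          (fun s2 ix => pvWriteCell coordinates s2 (ix, iy)) s) st).2.2 = true ↔
        ∃ p ∈ F', pvBorder data p) ∧
      (∀ p ∈ F, p ∈ F') ∧
      (∀ p, pvStep data coordinates c p → p ∈ F') ∧
      (((PySem.List.pyRange (c.2 - 1) (c.2 + 2) 1).foldl
        (fun s iy => (PySem.List.pyRange (c.1 - 1) (c.1 + 2) 1).foldl
          (fun s2 ix => pvWriteCell coordinates s2 (ix, iy)) s) st).2.1 = false →
        (PySem.List.pyRange (c.2 - 1) (c.2 + 2) 1).foldl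
          (fun s iy => (PySem.List.pyRange (c.1 - 1) (c.1 + 2) 1).foldl
            (fun s2 ix => pvWriteCell coordinates s2 (ix, iy)) s) st = st) := by
  have main : ∀ (ys : List Int) (st : List (List Char) × Bool × Bool) (F : List (Int × Int)),
      st.1 = pvOverlay (pvGrid0 data) F →
      (∀ p ∈ F, pvC data coordinates p) →
      (∀ p ∈ F, pvVT data coordinates p) →
      (st.2.2 = true ↔ ∃ p ∈ F, pvBorder data p) →
      (∀ iy ∈ ys, c.2 - 1 ≤ iy ∧ iy ≤ c.2 + 1) →
      ∃ F', ((ys.foldl (fun s iy => (PySem.List.pyRange (c.1 - 1) (c.1 + 2) 1).foldl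
            (fun s2 ix => pvWriteCell coordinates s2 (ix, iy)) s) st).1 =
          pvOverlay (pvGrid0 data) F') ∧
        (∀ p ∈ F', pvC data coordinates p) ∧ (∀ p ∈ F', pvVT data coordinates p) ∧
        ((ys.foldl (fun s iy => (PySem.List.pyRange (c.1 - 1) (c.1 + 2) 1).foldl
            (fun s2 ix => pvWriteCell coordinates s2 (ix, iy)) s) st).2.2 = true ↔
          ∃ p ∈ F', pvBorder data p) ∧
        (∀ p ∈ F, p ∈ F') ∧
        (∀ iy ∈ ys, ∀ ix ∈ PySem.List.pyRange (c.1 - 1) (c.1 + 2) 1,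
          pvVT data coordinates (ix, iy) → (ix, iy) ∈ F') ∧
        ((ys.foldl (fun s iy => (PySem.List.pyRange (c.1 - 1) (c.1 + 2) 1).foldl
            (fun s2 ix => pvWriteCell coordinates s2 (ix, iy)) s) st).2.1 = false →
          ys.foldl (fun s iy => (PySem.List.pyRange (c.1 - 1) (c.1 + 2) 1).foldl
            (fun s2 ix => pvWriteCell coordinates s2 (ix, iy)) s) st = st) := by
    intro ys
    induction ys with
    | nil =>
      intro st F hov hC hvt hflag _
      exact ⟨F, hov, hC, hvt, hflag, fun p hp => hp, by simp, fun _ => rfl⟩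
    | cons iy rest ih =>
      intro st F hov hC hvt hflag hys
      have hadjs : ∀ ix ∈ PySem.List.pyRange (c.1 - 1) (c.1 + 2) 1, pvAdj c (ix, iy) := by
        intro ix hix
        rw [PySem.List.mem_pyRange_one] at hix
        have := hys iy (by simp)
        exact ⟨by simpa using hix.1, by simp; omega, by simpa using this.1, by simpa using this.2⟩
      obtain ⟨F1, h1ov, h1C, h1vt, h1flag, h1sub, h1hits, h1bp⟩ :=
        pvWriteRow data coordinates hne hpre c hsrc iy
          (PySem.List.pyRange (c.1 - 1) (c.1 + 2) 1) st F hov hC hvt hflag hadjs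
      obtain ⟨F2, h2ov, h2C, h2vt, h2flag, h2sub, h2hits, h2bp⟩ :=
        ih _ F1 h1ov h1C h1vt h1flag (fun z hz => hys z (by simp [hz]))
      rw [List.foldl_cons]
      refine ⟨F2, h2ov, h2C, h2vt, h2flag, fun p hp => h2sub p (h1sub p hp), ?_, ?_⟩
      · intro z hz ix hix hvtz
        rcases List.mem_cons.mp hz with rfl | hz'
        · exact h2sub _ (h1hits ix hix hvtz)
        · exact h2hits z hz' ix hix hvtz
      · intro hch
        have heq := h2bp hch
        rw [heq] at hch ⊢
        rw [h1bp hch]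
  obtain ⟨F', h1, h2, h3, h4, h5, h6, h7⟩ :=
    main (PySem.List.pyRange (c.2 - 1) (c.2 + 2) 1) st F hov hC hvt hflag
      (by intro iy hiy; rw [PySem.List.mem_pyRange_one] at hiy; omega)
  refine ⟨F', h1, h2, h3, h4, h5, ?_, h7⟩
  rintro p ⟨hadj, hvtp⟩
  obtain ⟨px, py⟩ := p
  have hpy : py ∈ PySem.List.pyRange (c.2 - 1) (c.2 + 2) 1 := by
    rw [PySem.List.mem_pyRange_one]
    obtain ⟨_, _, ha3, ha4⟩ := hadj
    constructor <;> [skip; skip] <;> simp only at ha3 ha4 <;> omega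
  have hpx : px ∈ PySem.List.pyRange (c.1 - 1) (c.1 + 2) 1 := by
    rw [PySem.List.mem_pyRange_one]
    obtain ⟨ha1, ha2, _, _⟩ := hadj
    constructor <;> [skip; skip] <;> simp only at ha1 ha2 <;> omega
  exact h6 py hpy px hpx hvtp

-- ==== A side: one scanned cell ====
theorem pvCellOne_isOne (g : List (List Char)) (x y : Int) (hx : 0 ≤ x) (hy : 0 ≤ y)
    (h : PySem.List.pyGetD (PySem.List.pyGetD g y []) x ' ' = '1') : pvIsOne g (x, y) := by
  have hrow : PySem.List.pyGetD g y [] = (g[y.toNat]?).getD [] := by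
    have h0 : PySem.List.pyGetD g y [] = (PySem.List.pyGet? g y).getD [] := rfl
    rw [h0, PySem.List.pyGet?_of_nonneg g hy]
  have hcell : PySem.List.pyGetD (PySem.List.pyGetD g y []) x ' ' =
      (((PySem.List.pyGetD g y [])[x.toNat]?).getD ' ') := by
    have h0 : PySem.List.pyGetD (PySem.List.pyGetD g y []) x ' ' =
        (PySem.List.pyGet? (PySem.List.pyGetD g y []) x).getD ' ' := rfl
    rw [h0, PySem.List.pyGet?_of_nonneg _ hx]
  by_cases hyl : y.toNat < g.length
  · by_cases hxl : x.toNat < (PySem.List.pyGetD g y []).length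
    · refine ⟨hx, hy, ?_, ?_, h⟩
      · show y < (g.length : Int)
        omega
      · show x < ((PySem.List.pyGetD g y []).length : Int)
        omega
    · rw [hcell, List.getElem?_eq_none (by omega), Option.getD_none] at h
      exact absurd h (by decide)
  · have hrownil : PySem.List.pyGetD g y [] = [] := by
      rw [hrow, List.getElem?_eq_none (by omega), Option.getD_none]
    rw [hrownil] at h
    have h1 : PySem.List.pyGetD ([] : List Char) x ' ' = ' ' := by
      have h0 : PySem.List.pyGetD ([] : List Char) x ' ' =
          (PySem.List.pyGet? ([] : List Char) x).getD ' ' := rfl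
      rw [h0, PySem.List.pyGet?_of_nonneg _ hx]
      simp
    rw [h1] at h
    exact absurd h (by decide)

theorem pvProcessSeed_facts (data : List String) (coordinates : List (Int × Int))
    (hne : data ≠ []) (hpre : pvPreA data) (y x : Int) (hy : 0 ≤ y) (hx : 0 ≤ x)
    (st : List (List Char) × List (Int × Int) × Bool × Bool)
    (hInv : pvAInv data coordinates st.1 st.2.1 st.2.2.2 ∧ pvCkInv data st.2.1) :
    (pvAInv data coordinates (pvProcessSeed coordinates y st x).1
        (pvProcessSeed coordinates y st x).2.1 (pvProcessSeed coordinates y st x).2.2.2 ∧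
      pvCkInv data (pvProcessSeed coordinates y st x).2.1) ∧
    (∃ Δ, (pvProcessSeed coordinates y st x).2.1 = st.2.1 ++ Δ) ∧
    ((pvProcessSeed coordinates y st x).2.2.1 = false →
      st.2.2.1 = false ∧ (pvProcessSeed coordinates y st x).1 = st.1 ∧
      (pvProcessSeed coordinates y st x).2.2.2 = st.2.2.2) ∧
    ((pvProcessSeed coordinates y st x).2.1 = st.2.1 → pvProcessSeed coordinates y st x = st) ∧
    (pvCellAt st.1 (x, y) = '1' → (x, y) ∈ (pvProcessSeed coordinates y st x).2.1) := by
  obtain ⟨g0, ck0, ch0, ou0⟩ := st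
  obtain ⟨⟨F, hov, hC, hflag, hck⟩, hckNodup, hckMem⟩ := hInv
  simp only at hov hC hflag hck hckNodup hckMem
  subst hov
  rw [pvProcessSeed]
  by_cases hguard : PySem.List.pyGetD
      (PySem.List.pyGetD (pvOverlay (pvGrid0 data) F, ck0, ch0, ou0).1 y []) x ' ' = '1' ∧
      (x, y) ∉ (pvOverlay (pvGrid0 data) F, ck0, ch0, ou0).2.1
  · rw [if_pos hguard]
    obtain ⟨hcell, hnotck⟩ := hguard
    simp only at hcell hnotck
    have hone : pvIsOne (pvOverlay (pvGrid0 data) F) (x, y) :=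
      pvCellOne_isOne _ x y hx hy hcell
    have hvt : ∀ p ∈ F, pvVT data coordinates p := fun p hp => pvC_vt _ _ _ (hC p hp)
    have hsrc : pvIsOne (pvGrid0 data) (x, y) ∨ pvC data coordinates (x, y) := by
      rcases (pvIsOne_overlay data coordinates F hpre hvt _).mp hone with h | h
      · exact Or.inr (hC _ h)
      · exact Or.inl h
    obtain ⟨F', h1ov, h1C, h1vt, h1flag, h1sub, h1hits, h1bp⟩ :=
      pvWriteBlock data coordinates hne hpre (x, y) hsrc (pvOverlay (pvGrid0 data) F, ch0, ou0)
        F rfl hC hvt hflag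
    simp only at h1ov h1flag h1bp
    -- bounds of the new check coordinate
    have honeN := (pvIsOne_iff _ (x, y)).mp hone
    obtain ⟨a, b, hab, hbl, hal, -⟩ := honeN
    have hbl0 : b < (pvGrid0 data).length := by
      simpa [pvOverlay_length] using hbl
    have hal0 : a < ((pvGrid0 data)[b]).length := by
      have := pvOverlay_row_length (pvGrid0 data) F b hbl0
      omega
    have hmemU : (x, y) ∈ pvUnivA (pvGrid0 data) := by
      rw [hab]
      exact pvUnivA_mem (pvGrid0 data) a b hbl0 hal0
    refine ⟨⟨⟨F', h1ov, h1C, h1flag, ?_⟩, ?_, ?_⟩, ⟨[(x, y)], rfl⟩, ?_, ?_, ?_⟩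
    · -- check-targets
      intro c hc p hstep
      simp only [List.mem_append, List.mem_singleton] at hc
      rcases hc with hc | rfl
      · exact h1sub p (hck c hc p hstep)
      · exact h1hits p hstep
    · -- Nodup
      refine hckNodup.append (by simp) ?_
      intro z hz hz'
      simp only [List.mem_singleton] at hz'
      subst hz'
      exact hnotck hz
    · -- membership bounds
      intro c hc
      simp only [List.mem_append, List.mem_singleton] at hc
      rcases hc with hc | rfl
      · exact hckMem c hc
      · exact hmemU
    · -- back-propagation
      intro hch
      simp only at hch
      have heq := h1bp hch
      have h1 : ch0 = false := by rw [heq] at hch; exact hch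
      refine ⟨h1, ?_, ?_⟩ <;> simp only [heq]
    · -- check unchanged → state unchanged (impossible here)
      intro hcontra
      simp only at hcontra
      exfalso
      have := congrArg List.length hcontra
      simp at this
    · -- coverage
      intro _
      show (x, y) ∈ ck0 ++ [(x, y)]
      simp
  · rw [if_neg hguard]
    refine ⟨⟨⟨F, rfl, hC, hflag, hck⟩, hckNodup, hckMem⟩, ⟨[], by simp⟩,
      fun h => ⟨h, rfl, rfl⟩, fun _ => rfl, ?_⟩
    intro hcell
    simp only at hcell
    by_cases hmem : (x, y) ∈ ck0
    · simpa using hmem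
    · exact absurd ⟨hcell, hmem⟩ hguard

-- ==== A side: one row scan (fold over the x range) ====
theorem pvRowScan_fold (data : List String) (coordinates : List (Int × Int))
    (hne : data ≠ []) (hpre : pvPreA data) (y : Int) (hy : 0 ≤ y) :
    ∀ (xs : List Int), (∀ x ∈ xs, 0 ≤ x) →
    ∀ st : List (List Char) × List (Int × Int) × Bool × Bool,
      (pvAInv data coordinates st.1 st.2.1 st.2.2.2 ∧ pvCkInv data st.2.1) →
    (pvAInv data coordinates (xs.foldl (pvProcessSeed coordinates y) st).1
        (xs.foldl (pvProcessSeed coordinates y) st).2.1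
        (xs.foldl (pvProcessSeed coordinates y) st).2.2.2 ∧
      pvCkInv data (xs.foldl (pvProcessSeed coordinates y) st).2.1) ∧
    (∃ Δ, (xs.foldl (pvProcessSeed coordinates y) st).2.1 = st.2.1 ++ Δ) ∧
    ((xs.foldl (pvProcessSeed coordinates y) st).2.2.1 = false →
      st.2.2.1 = false ∧ (xs.foldl (pvProcessSeed coordinates y) st).1 = st.1 ∧
      (xs.foldl (pvProcessSeed coordinates y) st).2.2.2 = st.2.2.2) ∧
    ((xs.foldl (pvProcessSeed coordinates y) st).2.1 = st.2.1 →
      xs.foldl (pvProcessSeed coordinates y) st = st) ∧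
    ((xs.foldl (pvProcessSeed coordinates y) st).2.2.1 = false → ∀ x ∈ xs,
      pvCellAt (xs.foldl (pvProcessSeed coordinates y) st).1 (x, y) = '1' →
      (x, y) ∈ (xs.foldl (pvProcessSeed coordinates y) st).2.1) := by
  intro xs
  induction xs with
  | nil =>
    intro _ st hInv
    exact ⟨hInv, ⟨[], by simp⟩, fun h => ⟨h, rfl, rfl⟩, fun _ => rfl, by simp⟩
  | cons x rest ih =>
    intro hxs st hInv
    have hx0 : 0 ≤ x := hxs x (by simp)
    obtain ⟨hInv1, ⟨Δ1, hΔ1⟩, hbp1, hfix1, hcov1⟩ :=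
      pvProcessSeed_facts data coordinates hne hpre y x hy hx0 st hInv
    obtain ⟨hInv2, ⟨Δ2, hΔ2⟩, hbp2, hfix2, hcov2⟩ :=
      ih (fun z hz => hxs z (by simp [hz])) (pvProcessSeed coordinates y st x) hInv1
    rw [List.foldl_cons]
    refine ⟨hInv2, ⟨Δ1 ++ Δ2, by rw [hΔ2, hΔ1, List.append_assoc]⟩, ?_, ?_, ?_⟩
    · intro hch
      obtain ⟨h1, h2, h3⟩ := hbp2 hch
      obtain ⟨h4, h5, h6⟩ := hbp1 h1
      exact ⟨h4, by rw [h2, h5], by rw [h3, h6]⟩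
    · intro hckeq
      have hlen := congrArg List.length hckeq
      rw [hΔ2, hΔ1] at hlen
      simp only [List.append_assoc, List.length_append] at hlen
      have hΔ1nil : Δ1 = [] := List.eq_nil_of_length_eq_zero (by omega)
      have hΔ2nil : Δ2 = [] := List.eq_nil_of_length_eq_zero (by omega)
      have h2 := hfix2 (by rw [hΔ2, hΔ2nil]; simp)
      have h1 := hfix1 (by rw [hΔ1, hΔ1nil]; simp)
      rw [h2, h1]
    · intro hch z hz hcellz
      rcases List.mem_cons.mp hz with rfl | hz'
      · obtain ⟨h1, h2, h3⟩ := hbp2 hch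
        obtain ⟨h4, h5, h6⟩ := hbp1 h1
        rw [h2, h5] at hcellz
        rw [hΔ2]
        exact List.mem_append_left _ (hcov1 hcellz)
      · exact hcov2 hch z hz' hcellz

-- ==== A side: one full pass ====
theorem pvPass_inner (data : List String) (coordinates : List (Int × Int))
    (hne : data ≠ []) (hpre : pvPreA data) :
    ∀ (ys : List Int), (∀ y ∈ ys, 0 ≤ y) →
    ∀ st : List (List Char) × List (Int × Int) × Bool × Bool,
      (pvAInv data coordinates st.1 st.2.1 st.2.2.2 ∧ pvCkInv data st.2.1) →
    (pvAInv data coordinates (ys.foldl (pvRowScan coordinates) st).1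
        (ys.foldl (pvRowScan coordinates) st).2.1
        (ys.foldl (pvRowScan coordinates) st).2.2.2 ∧
      pvCkInv data (ys.foldl (pvRowScan coordinates) st).2.1) ∧
    (∃ Δ, (ys.foldl (pvRowScan coordinates) st).2.1 = st.2.1 ++ Δ) ∧
    ((ys.foldl (pvRowScan coordinates) st).2.2.1 = false →
      st.2.2.1 = false ∧ (ys.foldl (pvRowScan coordinates) st).1 = st.1 ∧
      (ys.foldl (pvRowScan coordinates) st).2.2.2 = st.2.2.2) ∧
    ((ys.foldl (pvRowScan coordinates) st).2.1 = st.2.1 →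
      ys.foldl (pvRowScan coordinates) st = st) ∧
    ((ys.foldl (pvRowScan coordinates) st).2.2.1 = false → ∀ y ∈ ys, ∀ x : Int, 0 ≤ x →
      x < (((PySem.List.pyGetD (ys.foldl (pvRowScan coordinates) st).1 y []).length : Nat) : Int) →
      pvCellAt (ys.foldl (pvRowScan coordinates) st).1 (x, y) = '1' →
      (x, y) ∈ (ys.foldl (pvRowScan coordinates) st).2.1) := by
  intro ys
  induction ys with
  | nil =>
    intro _ st hInv
    exact ⟨hInv, ⟨[], by simp⟩, fun h => ⟨h, rfl, rfl⟩, fun _ => rfl, by simp⟩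
  | cons y rest ih =>
    intro hys st hInv
    have hy0 : 0 ≤ y := hys y (by simp)
    have hxnn : ∀ x ∈ PySem.List.pyRange 0 (((PySem.List.pyGetD st.1 y []).length : Nat) : Int) 1, 0 ≤ x := by
      intro x hx
      rw [PySem.List.mem_pyRange_one] at hx
      exact hx.1
    obtain ⟨hInv1, ⟨Δ1, hΔ1⟩, hbp1, hfix1, hcov1⟩ :=
      pvRowScan_fold data coordinates hne hpre y hy0 _ hxnn st hInv
    have e : (PySem.List.pyRange 0 (((PySem.List.pyGetD st.1 y []).length : Nat) : Int) 1).foldl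
        (pvProcessSeed coordinates y) st = pvRowScan coordinates st y := rfl
    rw [e] at hInv1 hΔ1 hbp1 hfix1 hcov1
    obtain ⟨hInv2, ⟨Δ2, hΔ2⟩, hbp2, hfix2, hcov2⟩ :=
      ih (fun z hz => hys z (by simp [hz])) (pvRowScan coordinates st y) hInv1
    rw [List.foldl_cons]
    refine ⟨hInv2, ⟨Δ1 ++ Δ2, by rw [hΔ2]; rw [show (pvRowScan coordinates st y).2.1 = st.2.1 ++ Δ1 from hΔ1]; rw [List.append_assoc]⟩, ?_, ?_, ?_⟩
    · intro hch
      obtain ⟨h1, h2, h3⟩ := hbp2 hch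
      obtain ⟨h4, h5, h6⟩ := hbp1 h1
      exact ⟨h4, by rw [h2, h5], by rw [h3, h6]⟩
    · intro hckeq
      have hlen := congrArg List.length hckeq
      rw [hΔ2] at hlen
      rw [show (pvRowScan coordinates st y).2.1 = st.2.1 ++ Δ1 from hΔ1] at hlen
      simp only [List.append_assoc, List.length_append] at hlen
      have hΔ1nil : Δ1 = [] := List.eq_nil_of_length_eq_zero (by omega)
      have hΔ2nil : Δ2 = [] := List.eq_nil_of_length_eq_zero (by omega)
      have h2 := hfix2 (by rw [hΔ2, hΔ2nil]; simp)
      have h1 := hfix1 (by rw [hΔ1, hΔ1nil]; simp)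
      rw [h2]
      exact h1
    · intro hch z hz xx hxx0 hxxlt hcellz
      rcases List.mem_cons.mp hz with rfl | hz'
      · obtain ⟨h1, h2, h3⟩ := hbp2 hch
        obtain ⟨h4, h5, h6⟩ := hbp1 h1
        rw [h2] at hcellz hxxlt
        rw [h5] at hxxlt
        have hxmem : xx ∈ PySem.List.pyRange 0 (((PySem.List.pyGetD st.1 z []).length : Nat) : Int) 1 := by
          rw [PySem.List.mem_pyRange_one]
          exact ⟨hxx0, hxxlt⟩
        have := hcov1 h1 xx hxmem hcellz
        rw [hΔ2]
        exact List.mem_append_left _ this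
      · exact hcov2 hch z hz' xx hxx0 hxxlt hcellz

theorem pvPass_facts (data : List String) (coordinates : List (Int × Int))
    (hne : data ≠ []) (hpre : pvPreA data)
    (st : List (List Char) × List (Int × Int) × Bool × Bool)
    (hInv : pvAInv data coordinates st.1 st.2.1 st.2.2.2 ∧ pvCkInv data st.2.1) :
    (pvAInv data coordinates (pvPass coordinates st).1 (pvPass coordinates st).2.1
        (pvPass coordinates st).2.2.2 ∧ pvCkInv data (pvPass coordinates st).2.1) ∧
    (∃ Δ, (pvPass coordinates st).2.1 = st.2.1 ++ Δ) ∧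
    ((pvPass coordinates st).2.2.1 = false →
      st.2.2.1 = false ∧ (pvPass coordinates st).1 = st.1 ∧
      (pvPass coordinates st).2.2.2 = st.2.2.2) ∧
    ((pvPass coordinates st).2.1 = st.2.1 → pvPass coordinates st = st) ∧
    ((pvPass coordinates st).2.2.1 = false → ∀ p, pvIsOne (pvPass coordinates st).1 p →
      p ∈ (pvPass coordinates st).2.1) := by
  have hynn : ∀ y ∈ PySem.List.pyRange 0 ((st.1.length : Nat) : Int) 1, 0 ≤ y := by
    intro y hy
    rw [PySem.List.mem_pyRange_one] at hy
    exact hy.1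
  obtain ⟨hInv1, hΔ, hbp, hfix, hcov⟩ :=
    pvPass_inner data coordinates hne hpre _ hynn st hInv
  rw [pvPass]
  refine ⟨hInv1, hΔ, hbp, hfix, ?_⟩
  intro hch p hone
  obtain ⟨h1, h2, h3⟩ := hbp hch
  rw [pvIsOne_iff] at hone
  obtain ⟨a, b, rfl, hbl, hal, hcell⟩ := hone
  have hblen : ((PySem.List.pyRange 0 ((st.1.length : Nat) : Int) 1).foldl
      (pvRowScan coordinates) st).1.length = st.1.length := by rw [h2]
  have hymem : ((b : Nat) : Int) ∈ PySem.List.pyRange 0 ((st.1.length : Nat) : Int) 1 := by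
    rw [PySem.List.mem_pyRange_one]
    constructor
    · exact_mod_cast Nat.zero_le b
    · rw [hblen] at hbl
      exact_mod_cast hbl
  have hrowget : PySem.List.pyGetD ((PySem.List.pyRange 0 ((st.1.length : Nat) : Int) 1).foldl
      (pvRowScan coordinates) st).1 ((b : Nat) : Int) [] =
      ((PySem.List.pyRange 0 ((st.1.length : Nat) : Int) 1).foldl (pvRowScan coordinates) st).1[b] := by
    rw [PySem.List.pyGetD_natCast, List.getD_eq_getElem _ _ hbl]
  apply hcov hch _ hymem ((a : Nat) : Int) (by exact_mod_cast Nat.zero_le a)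
  · rw [hrowget]
    exact_mod_cast hal
  · rw [pvCellAt_natCast _ a b hbl]
    exact hcell

-- ==== A side: the while loop reaches the closure ====
theorem pvLoopA_main (data : List String) (coordinates : List (Int × Int))
    (hne : data ≠ []) (hpre : pvPreA data) :
    ∀ (n : Nat) (g : List (List Char)) (ck : List (Int × Int)) (ou : Bool),
      pvAInv data coordinates g ck ou → pvCkInv data ck →
      (pvUnivA (pvGrid0 data)).length + 1 - ck.length ≤ n →
      ∃ F, (pvLoopA coordinates n (g, ck, ou)).1 = pvOverlay (pvGrid0 data) F ∧
        (∀ p, p ∈ F ↔ pvC data coordinates p) ∧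
        ((pvLoopA coordinates n (g, ck, ou)).2 = true ↔
          ∃ p, pvC data coordinates p ∧ pvBorder data p) := by
  intro n
  induction n with
  | zero =>
    intro g ck ou hA hCk hm
    exfalso
    have hle := pvNodup_length_le ck (pvUnivA (pvGrid0 data)) hCk.1 hCk.2
    omega
  | succ n ih =>
    intro g ck ou hA hCk hm
    obtain ⟨hInv1, ⟨Δ, hΔ⟩, hbp, hfix, hcov⟩ :=
      pvPass_facts data coordinates hne hpre (g, ck, false, ou) ⟨hA, hCk⟩
    simp only [pvLoopA]
    by_cases hch : (pvPass coordinates (g, ck, false, ou)).2.2.1 = true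
    · rw [if_pos hch]
      apply ih _ _ _ hInv1.1 hInv1.2
      have hne0 : Δ ≠ [] := by
        intro hnil
        have : (pvPass coordinates (g, ck, false, ou)).2.1 = ck := by
          rw [hΔ, hnil]; simp
        have heq := hfix this
        rw [heq] at hch
        simp at hch
      have hlen1 : (pvPass coordinates (g, ck, false, ou)).2.1.length = ck.length + Δ.length := by
        rw [hΔ]; simp
      have hge : 1 ≤ Δ.length := by
        rcases Δ with _ | ⟨a, b⟩
        · exact absurd rfl hne0
        · simp
      have hle := pvNodup_length_le _ (pvUnivA (pvGrid0 data)) hInv1.2.1 hInv1.2.2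
      omega
    · rw [if_neg hch]
      rw [Bool.not_eq_true] at hch
      obtain ⟨F, hovF, hCF, hflagF, hckF⟩ := hInv1.1
      have hvtF : ∀ p ∈ F, pvVT data coordinates p := fun p hp => pvC_vt _ _ _ (hCF p hp)
      have hclosed : ∀ q, pvIsOne (pvPass coordinates (g, ck, false, ou)).1 q →
          ∀ p, pvStep data coordinates q p → p ∈ F := by
        intro q hq p hstep
        exact hckF q (hcov hch q hq) p hstep
      have hCsubF : ∀ p, pvC data coordinates p → p ∈ F := by
        rintro p ⟨s0, hs0, htg⟩
        induction htg with
        | single hstep =>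
          apply hclosed s0 _ _ hstep
          rw [hovF]
          exact (pvIsOne_overlay data coordinates F hpre hvtF s0).mpr (Or.inr hs0)
        | tail htg2 hstep2 ih2 =>
          apply hclosed _ _ _ hstep2
          rw [hovF]
          exact (pvIsOne_overlay data coordinates F hpre hvtF _).mpr (Or.inl ih2)
      refine ⟨F, hovF, fun p => ⟨hCF p, hCsubF p⟩, ?_⟩
      constructor
      · intro h
        obtain ⟨p, hp, hb⟩ := hflagF.mp h
        exact ⟨p, hCF p hp, hb⟩
      · rintro ⟨p, hp, hb⟩
        exact hflagF.mpr ⟨p, hCsubF p hp, hb⟩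

-- ==== B side ====
def pvBInv (data : List String) (coordinates : List (Int × Int))
    (stack seen filled : List (Int × Int)) (ou : Bool) : Prop :=
  (∀ p ∈ filled, pvC data coordinates p) ∧
  (∀ p ∈ filled, pvVT data coordinates p) ∧
  (ou = true ↔ ∃ p ∈ filled, pvBorder data p) ∧
  (∀ q, (q ∈ pvSeedsB (pvGrid0 data) ∨ q ∈ filled) → q ∈ seen ∨ q ∈ stack) ∧
  (∀ q ∈ seen, ∀ p, pvStep data coordinates q p → p ∈ filled) ∧
  (∀ q ∈ stack, q ∈ pvSeedsB (pvGrid0 data) ∨ q ∈ filled) ∧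
  seen.Nodup ∧ (∀ q ∈ seen, q ∈ pvSeedsB (pvGrid0 data) ∨ q ∈ filled)

-- ==== B side: the neighbour sweep of one popped source ====
theorem pvVisitCell_step (data : List String) (coordinates : List (Int × Int))
    (p : Int × Int) (nx ny : Int) (hsrc : pvIsOne (pvGrid0 data) p ∨ pvC data coordinates p)
    (hadj : pvAdj p (nx, ny))
    (st : List (Int × Int) × List (Int × Int) × Bool)
    (hC : ∀ r ∈ st.2.1, pvC data coordinates r)
    (hvt : ∀ r ∈ st.2.1, pvVT data coordinates r)
    (hflag : st.2.2 = true ↔ ∃ r ∈ st.2.1, pvBorder data r) :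
    (∀ r ∈ (pvVisitCell (PySem.Set.ofList coordinates) (pvWd data) (pvHt data) ny st nx).2.1,
      pvC data coordinates r) ∧
    (∀ r ∈ (pvVisitCell (PySem.Set.ofList coordinates) (pvWd data) (pvHt data) ny st nx).2.1,
      pvVT data coordinates r) ∧
    ((pvVisitCell (PySem.Set.ofList coordinates) (pvWd data) (pvHt data) ny st nx).2.2 = true ↔
      ∃ r ∈ (pvVisitCell (PySem.Set.ofList coordinates) (pvWd data) (pvHt data) ny st nx).2.1,
        pvBorder data r) ∧
    (∀ z ∈ st.2.1, z ∈ (pvVisitCell (PySem.Set.ofList coordinates) (pvWd data) (pvHt data) ny st nx).2.1) ∧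
    (∀ z ∈ (pvVisitCell (PySem.Set.ofList coordinates) (pvWd data) (pvHt data) ny st nx).2.1,
      z ∈ st.2.1 ∨ z ∈ (pvVisitCell (PySem.Set.ofList coordinates) (pvWd data) (pvHt data) ny st nx).1) ∧
    (∀ z ∈ st.1, z ∈ (pvVisitCell (PySem.Set.ofList coordinates) (pvWd data) (pvHt data) ny st nx).1) ∧
    (∀ z ∈ (pvVisitCell (PySem.Set.ofList coordinates) (pvWd data) (pvHt data) ny st nx).1,
      z ∈ st.1 ∨ z ∈ (pvVisitCell (PySem.Set.ofList coordinates) (pvWd data) (pvHt data) ny st nx).2.1) ∧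
    ((pvVisitCell (PySem.Set.ofList coordinates) (pvWd data) (pvHt data) ny st nx).1.length ≤
      st.1.length + 1) ∧
    (pvVT data coordinates (nx, ny) →
      (nx, ny) ∈ (pvVisitCell (PySem.Set.ofList coordinates) (pvWd data) (pvHt data) ny st nx).2.1) := by
  obtain ⟨stk0, fil0, ou0⟩ := st
  simp only at hC hvt hflag
  rw [pvVisitCell]
  by_cases hcond : 0 ≤ nx ∧ nx < pvWd data ∧ 0 ≤ ny ∧ ny < pvHt data ∧
      (nx, ny) ∉ PySem.Set.ofList coordinates
  · rw [if_pos hcond]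
    have hvtq : pvVT data coordinates (nx, ny) := by
      obtain ⟨h1, h2, h3, h4, h5⟩ := hcond
      refine ⟨h1, h2, h3, h4, ?_⟩
      intro hmem
      exact h5 ((PySem.Set.mem_ofList coordinates (nx, ny)).mpr hmem)
    have hCq : pvC data coordinates (nx, ny) := by
      rcases hsrc with h1 | h1
      · exact ⟨p, h1, Relation.TransGen.single ⟨hadj, hvtq⟩⟩
      · obtain ⟨s0, hs0, htg⟩ := h1
        exact ⟨s0, hs0, htg.tail ⟨hadj, hvtq⟩⟩
    have hbord : (nx = 0 ∨ nx = pvWd data - 1 ∨ ny = 0 ∨ ny = pvHt data - 1) ↔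
        pvBorder data (nx, ny) := Iff.rfl
    by_cases hfil : (nx, ny) ∈ fil0
    · rw [if_pos hfil]
      simp only
      refine ⟨hC, hvt, ?_, fun z hz => hz, fun z hz => Or.inl hz, fun z hz => hz,
        fun z hz => Or.inl hz, by omega, fun _ => hfil⟩
      rw [Bool.or_eq_true, decide_eq_true_eq]
      constructor
      · rintro (h | h)
        · exact hflag.mp h
        · exact ⟨(nx, ny), hfil, hbord.mp h⟩
      · rintro ⟨r, hr, hb⟩
        exact Or.inl (hflag.mpr ⟨r, hr, hb⟩)
    · rw [if_neg hfil]
      simp only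
      rw [PySem.Set.add_of_not_mem hfil]
      refine ⟨?_, ?_, ?_, ?_, ?_, ?_, ?_, by simp, ?_⟩
      · intro r hr
        rcases List.mem_append.mp hr with h | h
        · exact hC r h
        · rw [List.mem_singleton.mp h]; exact hCq
      · intro r hr
        rcases List.mem_append.mp hr with h | h
        · exact hvt r h
        · rw [List.mem_singleton.mp h]; exact hvtq
      · rw [Bool.or_eq_true, decide_eq_true_eq]
        constructor
        · rintro (h | h)
          · obtain ⟨r, hr, hb⟩ := hflag.mp h
            exact ⟨r, List.mem_append_left _ hr, hb⟩
          · exact ⟨(nx, ny), List.mem_append_right _ (by simp), hbord.mp h⟩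
        · rintro ⟨r, hr, hb⟩
          rcases List.mem_append.mp hr with h | h
          · exact Or.inl (hflag.mpr ⟨r, h, hb⟩)
          · right
            rw [List.mem_singleton.mp h] at hb
            exact hbord.mpr hb
      · intro z hz; exact List.mem_append_left _ hz
      · intro z hz
        rcases List.mem_append.mp hz with h | h
        · exact Or.inl h
        · right
          rw [List.mem_singleton.mp h]
          simp
      · intro z hz; simp [hz]
      · intro z hz
        rcases List.mem_cons.mp hz with rfl | h
        · exact Or.inr (List.mem_append_right _ (by simp))
        · exact Or.inl h
      · intro _
        exact List.mem_append_right _ (by simp)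
  · rw [if_neg hcond]
    refine ⟨hC, hvt, hflag, fun z hz => hz, fun z hz => Or.inl hz, fun z hz => hz,
      fun z hz => Or.inl hz, by omega, ?_⟩
    intro hvtq
    exfalso
    apply hcond
    obtain ⟨h1, h2, h3, h4, h5⟩ := hvtq
    refine ⟨h1, h2, h3, h4, ?_⟩
    intro hmem
    exact h5 ((PySem.Set.mem_ofList coordinates (nx, ny)).mp hmem)

theorem pvVisitNbrs_facts (data : List String) (coordinates : List (Int × Int))
    (p : Int × Int) (hsrc : pvIsOne (pvGrid0 data) p ∨ pvC data coordinates p)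
    (st : List (Int × Int) × List (Int × Int) × Bool)
    (hC : ∀ r ∈ st.2.1, pvC data coordinates r)
    (hvt : ∀ r ∈ st.2.1, pvVT data coordinates r)
    (hflag : st.2.2 = true ↔ ∃ r ∈ st.2.1, pvBorder data r) :
    (∀ r ∈ (pvVisitNbrs (PySem.Set.ofList coordinates) (pvWd data) (pvHt data) p st).2.1,
      pvC data coordinates r) ∧
    (∀ r ∈ (pvVisitNbrs (PySem.Set.ofList coordinates) (pvWd data) (pvHt data) p st).2.1,
      pvVT data coordinates r) ∧
    ((pvVisitNbrs (PySem.Set.ofList coordinates) (pvWd data) (pvHt data) p st).2.2 = true ↔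
      ∃ r ∈ (pvVisitNbrs (PySem.Set.ofList coordinates) (pvWd data) (pvHt data) p st).2.1,
        pvBorder data r) ∧
    (∀ z ∈ st.2.1, z ∈ (pvVisitNbrs (PySem.Set.ofList coordinates) (pvWd data) (pvHt data) p st).2.1) ∧
    (∀ z ∈ (pvVisitNbrs (PySem.Set.ofList coordinates) (pvWd data) (pvHt data) p st).2.1,
      z ∈ st.2.1 ∨ z ∈ (pvVisitNbrs (PySem.Set.ofList coordinates) (pvWd data) (pvHt data) p st).1) ∧
    (∀ z ∈ st.1, z ∈ (pvVisitNbrs (PySem.Set.ofList coordinates) (pvWd data) (pvHt data) p st).1) ∧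
    (∀ z ∈ (pvVisitNbrs (PySem.Set.ofList coordinates) (pvWd data) (pvHt data) p st).1,
      z ∈ st.1 ∨ z ∈ (pvVisitNbrs (PySem.Set.ofList coordinates) (pvWd data) (pvHt data) p st).2.1) ∧
    ((pvVisitNbrs (PySem.Set.ofList coordinates) (pvWd data) (pvHt data) p st).1.length ≤
      st.1.length + 9) ∧
    (∀ t, pvStep data coordinates p t →
      t ∈ (pvVisitNbrs (PySem.Set.ofList coordinates) (pvWd data) (pvHt data) p st).2.1) := by
  have row : ∀ (ny : Int), p.2 - 1 ≤ ny → ny ≤ p.2 + 1 →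
      ∀ (xs : List Int), (∀ nx ∈ xs, p.1 - 1 ≤ nx ∧ nx ≤ p.1 + 1) →
      ∀ st : List (Int × Int) × List (Int × Int) × Bool,
      (∀ r ∈ st.2.1, pvC data coordinates r) →
      (∀ r ∈ st.2.1, pvVT data coordinates r) →
      (st.2.2 = true ↔ ∃ r ∈ st.2.1, pvBorder data r) →
      (∀ r ∈ (xs.foldl (pvVisitCell (PySem.Set.ofList coordinates) (pvWd data) (pvHt data) ny) st).2.1,
        pvC data coordinates r) ∧
      (∀ r ∈ (xs.foldl (pvVisitCell (PySem.Set.ofList coordinates) (pvWd data) (pvHt data) ny) st).2.1,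
        pvVT data coordinates r) ∧
      ((xs.foldl (pvVisitCell (PySem.Set.ofList coordinates) (pvWd data) (pvHt data) ny) st).2.2 = true ↔
        ∃ r ∈ (xs.foldl (pvVisitCell (PySem.Set.ofList coordinates) (pvWd data) (pvHt data) ny) st).2.1,
          pvBorder data r) ∧
      (∀ z ∈ st.2.1, z ∈ (xs.foldl (pvVisitCell (PySem.Set.ofList coordinates) (pvWd data) (pvHt data) ny) st).2.1) ∧
      (∀ z ∈ (xs.foldl (pvVisitCell (PySem.Set.ofList coordinates) (pvWd data) (pvHt data) ny) st).2.1,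
        z ∈ st.2.1 ∨ z ∈ (xs.foldl (pvVisitCell (PySem.Set.ofList coordinates) (pvWd data) (pvHt data) ny) st).1) ∧
      (∀ z ∈ st.1, z ∈ (xs.foldl (pvVisitCell (PySem.Set.ofList coordinates) (pvWd data) (pvHt data) ny) st).1) ∧
      (∀ z ∈ (xs.foldl (pvVisitCell (PySem.Set.ofList coordinates) (pvWd data) (pvHt data) ny) st).1,
        z ∈ st.1 ∨ z ∈ (xs.foldl (pvVisitCell (PySem.Set.ofList coordinates) (pvWd data) (pvHt data) ny) st).2.1) ∧
      ((xs.foldl (pvVisitCell (PySem.Set.ofList coordinates) (pvWd data) (pvHt data) ny) st).1.length ≤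
        st.1.length + xs.length) ∧
      (∀ nx ∈ xs, pvVT data coordinates (nx, ny) →
        (nx, ny) ∈ (xs.foldl (pvVisitCell (PySem.Set.ofList coordinates) (pvWd data) (pvHt data) ny) st).2.1) := by
    intro ny hny1 hny2 xs
    induction xs with
    | nil =>
      intro _ st hC hvt hflag
      exact ⟨hC, hvt, hflag, fun z hz => hz, fun z hz => Or.inl hz, fun z hz => hz,
        fun z hz => Or.inl hz, by simp, by simp⟩
    | cons nx rest ih =>
      intro hxs st hC hvt hflag
      have hadj : pvAdj p (nx, ny) := by
        obtain ⟨ha, hb⟩ := hxs nx (by simp)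
        exact ⟨by simpa using ha, by simpa using hb, by simpa using hny1, by simpa using hny2⟩
      obtain ⟨a1, a2, a3, a4, a5, a6, a7, a8, a9⟩ :=
        pvVisitCell_step data coordinates p nx ny hsrc hadj st hC hvt hflag
      obtain ⟨b1, b2, b3, b4, b5, b6, b7, b8, b9⟩ :=
        ih (fun z hz => hxs z (by simp [hz]))
          (pvVisitCell (PySem.Set.ofList coordinates) (pvWd data) (pvHt data) ny st nx) a1 a2 a3
      rw [List.foldl_cons]
      refine ⟨b1, b2, b3, fun z hz => b4 z (a4 z hz), ?_, fun z hz => b6 z (a6 z hz), ?_, ?_, ?_⟩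
      · intro z hz
        rcases b5 z hz with h | h
        · rcases a5 z h with h2 | h2
          · exact Or.inl h2
          · exact Or.inr (b6 z h2)
        · exact Or.inr h
      · intro z hz
        rcases b7 z hz with h | h
        · rcases a7 z h with h2 | h2
          · exact Or.inl h2
          · exact Or.inr (b4 z h2)
        · exact Or.inr h
      · simp only [List.length_cons]
        omega
      · intro nx2 hnx2 hvt2
        rcases List.mem_cons.mp hnx2 with rfl | h
        · exact b4 _ (a9 hvt2)
        · exact b9 nx2 h hvt2
  have block : ∀ (ys : List Int), (∀ ny ∈ ys, p.2 - 1 ≤ ny ∧ ny ≤ p.2 + 1) →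
      ∀ st : List (Int × Int) × List (Int × Int) × Bool,
      (∀ r ∈ st.2.1, pvC data coordinates r) →
      (∀ r ∈ st.2.1, pvVT data coordinates r) →
      (st.2.2 = true ↔ ∃ r ∈ st.2.1, pvBorder data r) →
      (∀ r ∈ (ys.foldl (fun s ny => (PySem.List.pyRange (p.1 - 1) (p.1 + 2) 1).foldl
          (pvVisitCell (PySem.Set.ofList coordinates) (pvWd data) (pvHt data) ny) s) st).2.1,
        pvC data coordinates r) ∧
      (∀ r ∈ (ys.foldl (fun s ny => (PySem.List.pyRange (p.1 - 1) (p.1 + 2) 1).foldl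
          (pvVisitCell (PySem.Set.ofList coordinates) (pvWd data) (pvHt data) ny) s) st).2.1,
        pvVT data coordinates r) ∧
      ((ys.foldl (fun s ny => (PySem.List.pyRange (p.1 - 1) (p.1 + 2) 1).foldl
          (pvVisitCell (PySem.Set.ofList coordinates) (pvWd data) (pvHt data) ny) s) st).2.2 = true ↔
        ∃ r ∈ (ys.foldl (fun s ny => (PySem.List.pyRange (p.1 - 1) (p.1 + 2) 1).foldl
          (pvVisitCell (PySem.Set.ofList coordinates) (pvWd data) (pvHt data) ny) s) st).2.1,
          pvBorder data r) ∧
      (∀ z ∈ st.2.1, z ∈ (ys.foldl (fun s ny => (PySem.List.pyRange (p.1 - 1) (p.1 + 2) 1).foldl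
          (pvVisitCell (PySem.Set.ofList coordinates) (pvWd data) (pvHt data) ny) s) st).2.1) ∧
      (∀ z ∈ (ys.foldl (fun s ny => (PySem.List.pyRange (p.1 - 1) (p.1 + 2) 1).foldl
          (pvVisitCell (PySem.Set.ofList coordinates) (pvWd data) (pvHt data) ny) s) st).2.1,
        z ∈ st.2.1 ∨ z ∈ (ys.foldl (fun s ny => (PySem.List.pyRange (p.1 - 1) (p.1 + 2) 1).foldl
          (pvVisitCell (PySem.Set.ofList coordinates) (pvWd data) (pvHt data) ny) s) st).1) ∧
      (∀ z ∈ st.1, z ∈ (ys.foldl (fun s ny => (PySem.List.pyRange (p.1 - 1) (p.1 + 2) 1).foldl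
          (pvVisitCell (PySem.Set.ofList coordinates) (pvWd data) (pvHt data) ny) s) st).1) ∧
      (∀ z ∈ (ys.foldl (fun s ny => (PySem.List.pyRange (p.1 - 1) (p.1 + 2) 1).foldl
          (pvVisitCell (PySem.Set.ofList coordinates) (pvWd data) (pvHt data) ny) s) st).1,
        z ∈ st.1 ∨ z ∈ (ys.foldl (fun s ny => (PySem.List.pyRange (p.1 - 1) (p.1 + 2) 1).foldl
          (pvVisitCell (PySem.Set.ofList coordinates) (pvWd data) (pvHt data) ny) s) st).2.1) ∧
      ((ys.foldl (fun s ny => (PySem.List.pyRange (p.1 - 1) (p.1 + 2) 1).foldl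
          (pvVisitCell (PySem.Set.ofList coordinates) (pvWd data) (pvHt data) ny) s) st).1.length ≤
        st.1.length + ys.length * 3) ∧
      (∀ ny ∈ ys, ∀ nx ∈ PySem.List.pyRange (p.1 - 1) (p.1 + 2) 1, pvVT data coordinates (nx, ny) →
        (nx, ny) ∈ (ys.foldl (fun s ny => (PySem.List.pyRange (p.1 - 1) (p.1 + 2) 1).foldl
          (pvVisitCell (PySem.Set.ofList coordinates) (pvWd data) (pvHt data) ny) s) st).2.1) := by
    intro ys
    induction ys with
    | nil =>
      intro _ st hC hvt hflag
      exact ⟨hC, hvt, hflag, fun z hz => hz, fun z hz => Or.inl hz, fun z hz => hz,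
        fun z hz => Or.inl hz, by simp, by simp⟩
    | cons ny rest ih =>
      intro hys st hC hvt hflag
      have hxsb : ∀ nx ∈ PySem.List.pyRange (p.1 - 1) (p.1 + 2) 1, p.1 - 1 ≤ nx ∧ nx ≤ p.1 + 1 := by
        intro nx hnx
        rw [PySem.List.mem_pyRange_one] at hnx
        omega
      obtain ⟨hny1, hny2⟩ := hys ny (by simp)
      obtain ⟨a1, a2, a3, a4, a5, a6, a7, a8, a9⟩ :=
        row ny hny1 hny2 (PySem.List.pyRange (p.1 - 1) (p.1 + 2) 1) hxsb st hC hvt hflag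
      obtain ⟨b1, b2, b3, b4, b5, b6, b7, b8, b9⟩ :=
        ih (fun z hz => hys z (by simp [hz])) _ a1 a2 a3
      rw [List.foldl_cons]
      refine ⟨b1, b2, b3, fun z hz => b4 z (a4 z hz), ?_, fun z hz => b6 z (a6 z hz), ?_, ?_, ?_⟩
      · intro z hz
        rcases b5 z hz with h | h
        · rcases a5 z h with h2 | h2
          · exact Or.inl h2
          · exact Or.inr (b6 z h2)
        · exact Or.inr h
      · intro z hz
        rcases b7 z hz with h | h
        · rcases a7 z h with h2 | h2
          · exact Or.inl h2
          · exact Or.inr (b4 z h2)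
        · exact Or.inr h
      · have hxl : (PySem.List.pyRange (p.1 - 1) (p.1 + 2) 1).length = 3 := by
          rw [PySem.List.length_pyRange_one]
          simp only [show p.1 + 2 - (p.1 - 1) = 3 by ring]
          rfl
        rw [hxl] at a8
        simp only [List.length_cons]
        omega
      · intro ny2 hny2' nx hnx hvt2
        rcases List.mem_cons.mp hny2' with rfl | h
        · exact b4 _ (a9 nx hnx hvt2)
        · exact b9 ny2 h nx hnx hvt2
  obtain ⟨c1, c2, c3, c4, c5, c6, c7, c8, c9⟩ :=
    block (PySem.List.pyRange (p.2 - 1) (p.2 + 2) 1)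
      (by intro ny hny; rw [PySem.List.mem_pyRange_one] at hny; omega) st hC hvt hflag
  rw [pvVisitNbrs]
  refine ⟨c1, c2, c3, c4, c5, c6, c7, ?_, ?_⟩
  · have hyl : (PySem.List.pyRange (p.2 - 1) (p.2 + 2) 1).length = 3 := by
      rw [PySem.List.length_pyRange_one]
      simp only [show p.2 + 2 - (p.2 - 1) = 3 by ring]
      rfl
    rw [hyl] at c8
    omega
  · rintro t ⟨hadj, hvtt⟩
    obtain ⟨tx, ty⟩ := t
    have hty : ty ∈ PySem.List.pyRange (p.2 - 1) (p.2 + 2) 1 := by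
      rw [PySem.List.mem_pyRange_one]
      obtain ⟨_, _, h3, h4⟩ := hadj
      simp only at h3 h4
      omega
    have htx : tx ∈ PySem.List.pyRange (p.1 - 1) (p.1 + 2) 1 := by
      rw [PySem.List.mem_pyRange_one]
      obtain ⟨h1, h2, _, _⟩ := hadj
      simp only at h1 h2
      omega
    exact c9 ty hty tx htx hvtt

-- the box of all in-bounds cells, for bounding `seen`
def pvBox (data : List String) : List (Int × Int) :=
  (List.range data.length).flatMap fun (y : Nat) =>
    (List.range (data.headD "").toList.length).map fun (x : Nat) => ((x : Int), (y : Int))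

theorem pvBox_length (data : List String) :
    (pvBox data).length = (data.headD "").toList.length * data.length := by
  have h : ∀ (H W : Nat), ((List.range H).flatMap fun (y : Nat) =>
      (List.range W).map fun (x : Nat) => ((x : Int), (y : Int))).length = W * H := by
    intro H W
    induction H with
    | zero => simp
    | succ n ih =>
      rw [List.range_succ, List.flatMap_append]
      simp [ih, Nat.mul_succ]
  exact h data.length (data.headD "").toList.length

theorem pvBox_mem (data : List String) (coordinates : List (Int × Int)) (p : Int × Int)
    (h : pvVT data coordinates p) : p ∈ pvBox data := by
  obtain ⟨h1, h2, h3, h4, _⟩ := h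
  rw [pvBox, List.mem_flatMap]
  refine ⟨p.2.toNat, ?_, ?_⟩
  · rw [List.mem_range]
    simp only [pvHt] at h4
    omega
  · rw [List.mem_map]
    refine ⟨p.1.toNat, ?_, ?_⟩
    · rw [List.mem_range]
      simp only [pvWd] at h2
      omega
    · cases p with
      | mk a b => simp only [Prod.mk.injEq]; constructor <;> omega

-- ==== B side: termination and correctness of the DFS ====
theorem pvBInv_final (data : List String) (coordinates : List (Int × Int))
    (seen filled : List (Int × Int)) (ou : Bool)
    (h : pvBInv data coordinates [] seen filled ou) :
    (∀ p, p ∈ filled ↔ pvC data coordinates p) ∧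
    (ou = true ↔ ∃ p, pvC data coordinates p ∧ pvBorder data p) := by
  obtain ⟨hC, hvt, hflag, hsrcs, hseen, hstk, hnd, hseensrc⟩ := h
  have hcl : ∀ q, (q ∈ pvSeedsB (pvGrid0 data) ∨ q ∈ filled) →
      ∀ t, pvStep data coordinates q t → t ∈ filled := by
    intro q hq t hstep
    rcases hsrcs q hq with h | h
    · exact hseen q h t hstep
    · simp at h
  have hCsub : ∀ p, pvC data coordinates p → p ∈ filled := by
    rintro p ⟨s0, hs0, htg⟩
    induction htg with
    | single hstep => exact hcl s0 (Or.inl ((pvSeedsB_mem _ s0).mpr hs0)) _ hstep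
    | tail htg2 hstep2 ih2 => exact hcl _ (Or.inr ih2) _ hstep2
  refine ⟨fun p => ⟨hC p, hCsub p⟩, ?_⟩
  constructor
  · intro h
    obtain ⟨r, hr, hb⟩ := hflag.mp h
    exact ⟨r, hC r hr, hb⟩
  · rintro ⟨r, hr, hb⟩
    exact hflag.mpr ⟨r, hCsub r hr, hb⟩

theorem pvDfs_main (data : List String) (coordinates : List (Int × Int)) :
    ∀ (n : Nat) (stack seen filled : List (Int × Int)) (ou : Bool),
      pvBInv data coordinates stack seen filled ou →
      stack.length + 10 * ((pvSeedsB (pvGrid0 data) ++ pvBox data).length - seen.length) ≤ n →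
      (∀ p, p ∈ (pvDfs (PySem.Set.ofList coordinates) (pvWd data) (pvHt data)
          n stack seen filled ou).1 ↔ pvC data coordinates p) ∧
      ((pvDfs (PySem.Set.ofList coordinates) (pvWd data) (pvHt data)
          n stack seen filled ou).2 = true ↔
        ∃ p, pvC data coordinates p ∧ pvBorder data p) := by
  intro n
  induction n with
  | zero =>
    intro stack seen filled ou hInv hm
    have hstk : stack = [] := List.eq_nil_of_length_eq_zero (by omega)
    subst hstk
    simpa only [pvDfs] using pvBInv_final data coordinates seen filled ou hInv
  | succ n ih =>
    intro stack seen filled ou hInv hm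
    rcases stack with _ | ⟨p, rest⟩
    · simpa only [pvDfs] using pvBInv_final data coordinates seen filled ou hInv
    · simp only [pvDfs]
      by_cases hmem : p ∈ seen
      · rw [if_pos hmem]
        obtain ⟨hC, hvt, hflag, hsrcs, hseen, hstk, hnd, hseensrc⟩ := hInv
        refine ih rest seen filled ou ⟨hC, hvt, hflag, ?_, hseen, ?_, hnd, hseensrc⟩ ?_
        · intro q hq
          rcases hsrcs q hq with h | h
          · exact Or.inl h
          · rcases List.mem_cons.mp h with rfl | h2
            · exact Or.inl hmem
            · exact Or.inr h2
        · intro q hq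
          exact hstk q (by simp [hq])
        · simp only [List.length_cons] at hm
          omega
      · rw [if_neg hmem]
        obtain ⟨hC, hvt, hflag, hsrcs, hseen, hstk, hnd, hseensrc⟩ := hInv
        have hpstack : p ∈ pvSeedsB (pvGrid0 data) ∨ p ∈ filled := hstk p (by simp)
        have hpsrc : pvIsOne (pvGrid0 data) p ∨ pvC data coordinates p := by
          rcases hpstack with h | h
          · exact Or.inl ((pvSeedsB_mem _ p).mp h)
          · exact Or.inr (hC p h)
        obtain ⟨c1, c2, c3, c4, c5, c6, c7, c8, c9⟩ :=
          pvVisitNbrs_facts data coordinates p hpsrc (rest, filled, ou) hC hvt hflag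
        rw [PySem.Set.add_of_not_mem hmem]
        have hnd' : (seen ++ [p]).Nodup := by
          refine hnd.append (by simp) ?_
          intro z hz hz'
          simp only [List.mem_singleton] at hz'
          subst hz'
          exact hmem hz
        have hseensrc' : ∀ q ∈ seen ++ [p], q ∈ pvSeedsB (pvGrid0 data) ∨
            q ∈ (pvVisitNbrs (PySem.Set.ofList coordinates) (pvWd data) (pvHt data) p
              (rest, filled, ou)).2.1 := by
          intro q hq
          rcases List.mem_append.mp hq with h | h
          · exact (hseensrc q h).imp_right (c4 q)
          · rw [List.mem_singleton.mp h]
            exact hpstack.imp_right (c4 p)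
        have hseenbnd : (seen ++ [p]).length ≤ (pvSeedsB (pvGrid0 data) ++ pvBox data).length := by
          apply pvNodup_length_le _ _ hnd'
          intro q hq
          rcases hseensrc' q hq with h | h
          · exact List.mem_append_left _ h
          · exact List.mem_append_right _ (pvBox_mem data coordinates q (c2 q h))
        refine ih _ _ _ _ ⟨c1, c2, c3, ?_, ?_, ?_, hnd', hseensrc'⟩ ?_
        · -- every source is seen or on the stack
          intro q hq
          have hq' : q ∈ pvSeedsB (pvGrid0 data) ∨ q ∈ filled ∨
              q ∈ (pvVisitNbrs (PySem.Set.ofList coordinates) (pvWd data) (pvHt data) p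
                (rest, filled, ou)).1 := by
            rcases hq with h | h
            · exact Or.inl h
            · rcases c5 q h with h2 | h2
              · exact Or.inr (Or.inl h2)
              · exact Or.inr (Or.inr h2)
          rcases hq' with h | h | h
          · rcases hsrcs q (Or.inl h) with h2 | h2
            · exact Or.inl (List.mem_append_left _ h2)
            · rcases List.mem_cons.mp h2 with rfl | h3
              · exact Or.inl (List.mem_append_right _ (by simp))
              · exact Or.inr (c6 q h3)
          · rcases hsrcs q (Or.inr h) with h2 | h2
            · exact Or.inl (List.mem_append_left _ h2)
            · rcases List.mem_cons.mp h2 with rfl | h3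
              · exact Or.inl (List.mem_append_right _ (by simp))
              · exact Or.inr (c6 q h3)
          · exact Or.inr h
        · -- every seen source has all its targets filled
          intro q hq t hstep
          rcases List.mem_append.mp hq with h | h
          · exact c4 _ (hseen q h t hstep)
          · rw [List.mem_singleton.mp h] at hstep
            exact c9 t hstep
        · -- the stack holds sources
          intro q hq
          rcases c7 q hq with h | h
          · exact (hstk q (by simp [h])).imp_right (c4 q)
          · exact Or.inr h
        · -- fuel
          have hc8' : (pvVisitNbrs (PySem.Set.ofList coordinates) (pvWd data) (pvHt data) p
              (rest, filled, ou)).1.length ≤ rest.length + 9 := by simpa using c8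
          have hbnd2 : seen.length + 1 ≤ (pvSeedsB (pvGrid0 data)).length + (pvBox data).length := by
            simpa using hseenbnd
          have hm2 : rest.length + 1 +
              10 * ((pvSeedsB (pvGrid0 data)).length + (pvBox data).length - seen.length) ≤
              n + 1 := by
            simpa using hm
          simp only [List.length_append, List.length_cons, List.length_nil, Nat.zero_add]
          omega

-- ==== no seeds: a pass is the identity ====
theorem pvNoOneCell (g : List (List Char)) (hno : ∀ row ∈ g, '1' ∉ row) (y x : Int) :
    PySem.List.pyGetD (PySem.List.pyGetD g y []) x ' ' ≠ '1' := by
  have hDef2 : PySem.List.pyGetD (PySem.List.pyGetD g y []) x ' ' =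
      (PySem.List.pyGet? (PySem.List.pyGetD g y []) x).getD ' ' := rfl
  rw [hDef2]
  rcases hc : PySem.List.pyGet? (PySem.List.pyGetD g y []) x with _ | c
  · simp
  · simp only [Option.getD_some]
    intro hcontra
    subst hcontra
    have hcm := PySem.List.mem_of_pyGet?_eq_some _ hc
    have hDef : PySem.List.pyGetD g y [] = (PySem.List.pyGet? g y).getD [] := rfl
    rw [hDef] at hcm
    rcases hr : PySem.List.pyGet? g y with _ | r
    · rw [hr] at hcm
      simp at hcm
    · rw [hr] at hcm
      simp only [Option.getD_some] at hcm
      exact hno r (PySem.List.mem_of_pyGet?_eq_some _ hr) hcm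

theorem pvPass_noSeed (coordinates : List (Int × Int)) (g : List (List Char))
    (hno : ∀ row ∈ g, '1' ∉ row) (ck : List (Int × Int)) (ou : Bool) :
    pvPass coordinates (g, ck, false, ou) = (g, ck, false, ou) := by
  rw [pvPass]
  apply pvFoldl_fix
  intro y _
  rw [pvRowScan]
  apply pvFoldl_fix
  intro x _
  rw [pvProcessSeed]
  rw [if_neg]
  rintro ⟨hcell, -⟩
  exact pvNoOneCell g hno y x hcell


-- ==== assembling the two ports ====
theorem pvMap_mapIdx {α β γ : Type} (l : List α) (f : Nat → α → β) (g : β → γ) :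
    (l.mapIdx f).map g = l.mapIdx (fun i a => g (f i a)) := by
  apply List.ext_getElem (by simp)
  intro i h1 h2
  simp [List.getElem_mapIdx]

theorem pvA_main (data : List String) (coordinates : List (Int × Int))
    (hne : data ≠ []) (hpreA : pvPreA data) :
    ∃ (F : List (Int × Int)) (ou : Bool), spread_filling data coordinates = ((pvOverlay (pvGrid0 data) F).map String.ofList, ou) ∧
      (∀ p, p ∈ F ↔ pvC data coordinates p) ∧
      (ou = true ↔ ∃ p, pvC data coordinates p ∧ pvBorder data p) := by
  have hAInv0 : pvAInv data coordinates (pvGrid0 data) [] false :=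
    ⟨([] : List (Int × Int)), (pvOverlay_nil _).symm, by simp, by simp, by simp⟩
  have hCkInv0 : pvCkInv data [] := ⟨List.nodup_nil, by simp⟩
  have hf := pvFuelA_ge (pvGrid0 data)
  have hu := pvUnivA_length (pvGrid0 data)
  obtain ⟨F, h1, h2, h3⟩ := pvLoopA_main data coordinates hne hpreA
    ((pvGrid0 data).foldl (fun a row => a + row.length + ((pvGrid0 data).headD []).length + 1) 2)
    (pvGrid0 data) [] false hAInv0 hCkInv0 (by omega)
  refine ⟨F, (pvLoopA coordinates
    ((pvGrid0 data).foldl (fun a row => a + row.length + ((pvGrid0 data).headD []).length + 1) 2)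
    (pvGrid0 data, [], false)).2, ?_, h2, h3⟩
  simp only [spread_filling]
  rw [show data.map (·.toList) = pvGrid0 data from rfl, h1]

theorem pvAltB_main (data : List String) (coordinates : List (Int × Int))
    (hne : data ≠ []) (hseeds : pvSeedsB (pvGrid0 data) ≠ []) :
    ∃ (fl : List (Int × Int)) (ou : Bool), spread_filling_alt data coordinates =
      ((pvGrid0 data).mapIdx (fun y row => String.ofList
        (row.mapIdx fun x ch => if ((x : Int), (y : Int)) ∈ fl then '1' else ch)), ou) ∧
      (∀ p, p ∈ fl ↔ pvC data coordinates p) ∧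
      (ou = true ↔ ∃ p, pvC data coordinates p ∧ pvBorder data p) := by
  have hBInv0 : pvBInv data coordinates (pvSeedsB (pvGrid0 data)).reverse [] [] false := by
    refine ⟨by simp, by simp, by simp, ?_, by simp, ?_, List.nodup_nil, by simp⟩
    · intro q hq
      rcases hq with h | h
      · exact Or.inr (List.mem_reverse.mpr h)
      · simp at h
    · intro q hq
      exact Or.inl (List.mem_reverse.mp hq)
  have hbox := pvBox_length data
  have hwh : (pvWd data).toNat = (data.headD "").toList.length := by
    simp [pvWd]
  have hht : (pvHt data).toNat = data.length := by
    simp [pvHt]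
  obtain ⟨h1, h2⟩ := pvDfs_main data coordinates
    ((pvSeedsB (pvGrid0 data)).length +
      10 * ((pvSeedsB (pvGrid0 data)).length + (pvWd data).toNat * (pvHt data).toNat) + 1)
    (pvSeedsB (pvGrid0 data)).reverse [] [] false hBInv0
    (by
      simp only [List.length_reverse, List.length_nil, Nat.sub_zero, List.length_append]
      rw [hwh, hht, hbox]
      omega)
  refine ⟨(pvDfs (PySem.Set.ofList coordinates) (pvWd data) (pvHt data)
      ((pvSeedsB (pvGrid0 data)).length +
        10 * ((pvSeedsB (pvGrid0 data)).length + (pvWd data).toNat * (pvHt data).toNat) + 1)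
      (pvSeedsB (pvGrid0 data)).reverse [] [] false).1,
    (pvDfs (PySem.Set.ofList coordinates) (pvWd data) (pvHt data)
      ((pvSeedsB (pvGrid0 data)).length +
        10 * ((pvSeedsB (pvGrid0 data)).length + (pvWd data).toNat * (pvHt data).toNat) + 1)
      (pvSeedsB (pvGrid0 data)).reverse [] [] false).2, ?_, h1, h2⟩
  simp only [spread_filling_alt]
  rw [if_neg (by simpa [List.isEmpty_iff] using hne)]
  rw [show data.map (·.toList) = pvGrid0 data from rfl]
  rw [if_neg (by simpa [List.isEmpty_iff] using hseeds)]
  rw [show ((data.headD "").toList.length : Int) = pvWd data from rfl,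
      show ((data.length : Nat) : Int) = pvHt data from rfl]
  rfl

-- ===== VERDICT (by name: the statement is the Claim_ definition above) =====
theorem spread_filling_spec : Claim_equal_spread_filling := by
  intro data coordinates _ hpre
  show spread_filling data coordinates = spread_filling_alt data coordinates
  by_cases hseeds : pvSeedsB (pvGrid0 data) = []
  · -- no seed anywhere: both sides return the input unchanged with flag False
    have hno : ∀ row ∈ pvGrid0 data, '1' ∉ row := by
      intro row hrow hone
      rw [List.mem_iff_getElem] at hrow
      obtain ⟨y, hy, rfl⟩ := hrow
      rw [List.mem_iff_getElem] at hone
      obtain ⟨x, hx, hch⟩ := hone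
      have hmem : ((x : Int), (y : Int)) ∈ pvSeedsB (pvGrid0 data) := by
        rw [pvSeedsB_mem, pvIsOne_iff]
        exact ⟨x, y, rfl, hy, hx, by rw [List.getD_eq_getElem _ _ hx]; exact hch⟩
      rw [hseeds] at hmem
      simp at hmem
    have hBval : spread_filling_alt data coordinates = (data, false) := by
      simp only [spread_filling_alt]
      by_cases hd : data.isEmpty = true
      · rw [if_pos hd]
      · rw [if_neg hd]
        rw [show data.map (·.toList) = pvGrid0 data from rfl]
        rw [if_pos (by rw [hseeds]; rfl)]
    have hAval : spread_filling data coordinates = (data, false) := by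
      simp only [spread_filling]
      rw [show data.map (·.toList) = pvGrid0 data from rfl]
      have hf := pvFuelA_ge (pvGrid0 data)
      obtain ⟨m, hm⟩ : ∃ m, (pvGrid0 data).foldl
          (fun a row => a + row.length + ((pvGrid0 data).headD []).length + 1) 2 = m + 1 :=
        ⟨(pvGrid0 data).foldl
          (fun a row => a + row.length + ((pvGrid0 data).headD []).length + 1) 2 - 1, by omega⟩
      rw [hm]
      simp only [pvLoopA]
      rw [pvPass_noSeed coordinates (pvGrid0 data) hno [] false]
      simp only [Bool.false_eq_true, if_false]
      rw [show pvGrid0 data = data.map (·.toList) from rfl]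
      rw [List.map_map]
      have : (String.ofList ∘ fun s : String => s.toList) = id := by
        funext z
        simp [String.ofList_toList]
      rw [this, List.map_id]
    rw [hAval, hBval]
  · have hne : data ≠ [] := by
      intro h
      subst h
      exact hseeds rfl
    have hpreA : pvPreA data := by
      rcases hpre with h | h
      · exact h
      · exfalso
        obtain ⟨p, hp⟩ := List.exists_mem_of_ne_nil _ hseeds
        rw [pvSeedsB_mem, pvIsOne_iff] at hp
        obtain ⟨x, y, rfl, hy, hx, hch⟩ := hp
        have hyd : y < data.length := by simpa [pvGrid0_length] using hy
        apply h (data[y]'hyd) (List.getElem_mem hyd)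
        rw [List.getD_eq_getElem _ _ hx] at hch
        have hrow : (pvGrid0 data)[y]'hy = (data[y]'hyd).toList := by
          simp [pvGrid0]
        rw [← hrow]
        rw [← hch]
        exact List.getElem_mem hx
    obtain ⟨F, ouA, hAeq, hAiff, hAflag⟩ := pvA_main data coordinates hne hpreA
    obtain ⟨fl, ouB, hBeq, hBiff, hBflag⟩ := pvAltB_main data coordinates hne hseeds
    rw [hAeq, hBeq]
    have hgrid : (pvOverlay (pvGrid0 data) F).map String.ofList =
        (pvGrid0 data).mapIdx (fun y row => String.ofList
          (row.mapIdx fun x ch => if ((x : Int), (y : Int)) ∈ fl then '1' else ch)) := by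
      rw [pvOverlay_congr (pvGrid0 data) F fl (fun p => (hAiff p).trans (hBiff p).symm)]
      rw [pvOverlay, pvMap_mapIdx]
    have hflagEq : ouA = ouB := Bool.coe_iff_coe.mp (hAflag.trans hBflag.symm)
    rw [hgrid, hflagEq]
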